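-- pv_equiv track=rewrite | github.com/Ag3497120/verantyx-v6 | arc/world_commands.py | move_all_to_right
-- ===== SOURCE A (Python) =====
-- from collections import Counter, defaultdict
--
-- def _bg(g):
--     c = Counter()
--     for row in g: c.update(row)
--     return c.most_common(1)[0][0]
--
-- def _objects(g, bg, conn=4):
--     h, w = len(g), len(g[0])
--     vis = [[False]*w for _ in range(h)]
--     objs = []
--     ds = [(-1,0),(1,0),(0,-1),(0,1)]
--     if conn == 8: ds += [(-1,-1),(-1,1),(1,-1),(1,1)]
--     for r in range(h):
--         for c in range(w):
--             if not vis[r][c] and g[r][c] != bg: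
--                 obj = []; stk = [(r,c)]; vis[r][c] = True
--                 while stk:
--                     cr, cc = stk.pop()
--                     obj.append((cr,cc,g[cr][cc]))
--                     for dr,dc in ds:
--                         nr,nc = cr+dr, cc+dc
--                         if 0<=nr<h and 0<=nc<w and not vis[nr][nc] and g[nr][nc] != bg:
--                             vis[nr][nc] = True; stk.append((nr,nc))
--                 objs.append(obj)
--     return objs
--
-- def move_all_to_right(g):
--     bg=_bg(g); objs=_objects(g,bg)
--     if not objs: return g
--     h,w=len(g),len(g[0]); res=[[bg]*w for _ in range(h)]
--     for obj in objs:
--         c1=max(c for r,c,v in obj)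
--         dc=w-1-c1
--         for r,c,v in obj:
--             if 0<=c+dc<w: res[r][c+dc]=v
--     return res
-- ===== SOURCE B (Python) =====
-- from collections import Counter
--
-- def _bg(g):
--     c = Counter()
--     for row in g: c.update(row)
--     return c.most_common(1)[0][0]
--
-- def move_all_to_right(g):
--     # Union-find over non-background cells: union each cell with its right and
--     # down non-bg neighbour, bucket cells by root in scan order, then shift each
--     # bucket so its rightmost column lands on the last column.
--     bg = _bg(g)
--     h, w = len(g), len(g[0])
--     parent = {}
--
--     def find(x):
--         while parent[x] != x:
--             x = parent[x]
--         return x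
--
--     def union(a, b):
--         ra, rb = find(a), find(b)
--         if ra != rb:
--             parent[ra] = rb
--
--     for r in range(h):
--         for c in range(w):
--             if g[r][c] == bg:
--                 continue
--             parent.setdefault((r, c), (r, c))
--             if c + 1 < w and g[r][c + 1] != bg:
--                 parent.setdefault((r, c + 1), (r, c + 1))
--                 union((r, c), (r, c + 1))
--             if r + 1 < h and g[r + 1][c] != bg:
--                 parent.setdefault((r + 1, c), (r + 1, c))
--                 union((r, c), (r + 1, c))
--
--     comps = {}
--     for r in range(h):
--         for c in range(w):
--             if g[r][c] != bg:
--                 comps.setdefault(find((r, c)), []).append((r, c, g[r][c]))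
--     if not comps:
--         return g
--
--     res = [[bg] * w for _ in range(h)]
--     for obj in comps.values():
--         dc = w - 1 - max(c for _, c, _ in obj)
--         for r, c, v in obj:
--             res[r][c + dc] = v
--     return res
-- ===== Notes on version B (the rewrite author's own statement) =====
-- stated objective: alternative
-- what changed: Replaces the DFS flood fill (explicit stack, visited grid, per-seed object lists) by a union-find over non-background cells: each cell is unioned with its right and down non-background neighbours, cells are then bucketed by root in scan order, and each bucket is shifted so its rightmost column lands on the last column.
import Mathlib
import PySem

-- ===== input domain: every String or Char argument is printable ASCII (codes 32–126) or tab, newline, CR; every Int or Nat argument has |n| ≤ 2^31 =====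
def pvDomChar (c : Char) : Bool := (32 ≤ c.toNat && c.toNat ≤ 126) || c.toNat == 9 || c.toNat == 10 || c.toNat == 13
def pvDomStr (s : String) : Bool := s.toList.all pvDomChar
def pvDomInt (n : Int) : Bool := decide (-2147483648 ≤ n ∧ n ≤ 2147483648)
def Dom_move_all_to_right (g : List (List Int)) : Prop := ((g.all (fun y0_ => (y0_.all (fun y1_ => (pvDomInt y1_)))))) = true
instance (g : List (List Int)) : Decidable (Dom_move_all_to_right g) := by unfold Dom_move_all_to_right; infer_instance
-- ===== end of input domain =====

-- B replaces A's DFS flood fill (explicit stack, visited grid, per-seed object lists) by a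
-- union-find over non-background cells: each cell is unioned with its right and down
-- non-background neighbours, cells are bucketed by root in scan order, and each bucket is
-- shifted so its rightmost column lands on the last column (objective: alternative).

-- ===== PORT A =====

-- g[r][c]; only evaluated with r,c in range under Pre_, default never observed there
def cellv (g : List (List Int)) (r c : Nat) : Int := (g.getD r []).getD c 0

-- shared helper: port of _bg (identical in Source A and Source B): Counter over the rows, then
-- most_common(1)[0][0] = the first-inserted key attaining the maximal count
def bgOf (g : List (List Int)) : Int :=
  let d : PySem.Dict Int Int :=
    g.foldl (fun d row => row.foldl (fun d x => d.modify x 0 (· + 1)) d) PySem.Dict.empty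
  (d.items.foldl (fun best kv => if best.2 < kv.2 then kv else best) (d.items.headD (0, 0))).1

-- ds = [(-1,0),(1,0),(0,-1),(0,1)] (conn=4 branch of _objects)
def dsA : List (Int × Int) := [(-1, 0), (1, 0), (0, -1), (0, 1)]

-- one neighbour candidate of p in direction d, if in bounds (Python's 0<=nr<h and 0<=nc<w)
def cand (h w : Nat) (p : Nat × Nat) (d : Int × Int) : Option (Nat × Nat) :=
  if 0 ≤ (p.1 : Int) + d.1 ∧ (p.1 : Int) + d.1 < (h : Int) ∧ 0 ≤ (p.2 : Int) + d.2 ∧ (p.2 : Int) + d.2 < (w : Int)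
  then some (((p.1 : Int) + d.1).toNat, ((p.2 : Int) + d.2).toNat) else none

-- A's neighbour push: mark visited and push onto the DFS stack (stack top = list head)
def tryPushA (g : List (List Int)) (bg : Int) (h w : Nat) (p : Nat × Nat)
    (st : List (Nat × Nat) × List (Nat × Nat)) (d : Int × Int) :
    List (Nat × Nat) × List (Nat × Nat) :=
  match cand h w p d with
  | some q => if ¬ q ∈ st.1 ∧ cellv g q.1 q.2 ≠ bg then (q :: st.1, q :: st.2) else st
  | none => st

def cellsOf (h w : Nat) : List (Nat × Nat) :=
  (List.range h).flatMap (fun r => (List.range w).map (fun c => (r, c)))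

-- number of unvisited cells: the termination measure of A's flood-fill loop
def unvis (h w : Nat) (vis : List (Nat × Nat)) : Nat :=
  (cellsOf h w).countP (fun q => !decide (q ∈ vis))

lemma mem_cellsOf {h w : Nat} {q : Nat × Nat} : q ∈ cellsOf h w ↔ q.1 < h ∧ q.2 < w := by
  obtain ⟨r, c⟩ := q
  simp [cellsOf, List.mem_flatMap, List.mem_map, List.mem_range]

lemma countP_lt_of {α : Type} (l : List α) (P Q : α → Bool)
    (himp : ∀ x, Q x = true → P x = true) (x0 : α) (hx : x0 ∈ l)
    (hP : P x0 = true) (hQ : Q x0 = false) : l.countP Q < l.countP P := by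
  induction l with
  | nil => simp at hx
  | cons a t ih =>
    rcases List.mem_cons.mp hx with rfl | hm
    · have h1 : t.countP Q ≤ t.countP P := List.countP_mono_left (fun x _ => himp x)
      simp [List.countP_cons, hP, hQ]; omega
    · have := ih hm
      by_cases hqa : Q a = true
      · simp [List.countP_cons, hqa, himp a hqa]; omega
      · simp at hqa
        simp [List.countP_cons, hqa]
        rcases hpa : P a <;> simp [hpa] <;> omega

lemma unvis_lt {h w : Nat} {vis L : List (Nat × Nat)} {q : Nat × Nat}
    (hq : q ∈ L) (hnv : ¬ q ∈ vis) (hb : q.1 < h ∧ q.2 < w) :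
    unvis h w (L ++ vis) < unvis h w vis := by
  have himp : ∀ x : Nat × Nat, (!decide (x ∈ L ++ vis)) = true → (!decide (x ∈ vis)) = true := by
    intro x hx
    simp at hx ⊢
    exact hx.2
  exact countP_lt_of _ _ _ himp q (mem_cellsOf.mpr hb) (by simpa using hnv)
    (by simp; exact fun hnL => absurd hq hnL)

-- spec of A's inner neighbour fold, also used for the termination of dfsA
lemma pushA_spec (g : List (List Int)) (bg : Int) (h w : Nat) (p : Nat × Nat) :
    ∀ (ds : List (Int × Int)) (vis stk : List (Nat × Nat)),
    ∃ L : List (Nat × Nat),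
      ds.foldl (tryPushA g bg h w p) (vis, stk) = (L ++ vis, L ++ stk) ∧
      L.Nodup ∧
      (∀ q ∈ L, ¬ q ∈ vis ∧ q.1 < h ∧ q.2 < w ∧ cellv g q.1 q.2 ≠ bg ∧ ∃ d ∈ ds, cand h w p d = some q) ∧
      (∀ d ∈ ds, ∀ q, cand h w p d = some q → cellv g q.1 q.2 ≠ bg → q ∈ L ++ vis) := by
  intro ds
  induction ds with
  | nil => intro vis stk; exact ⟨[], by simp, by simp, by simp, by simp⟩
  | cons d ds ih =>
    intro vis stk
    rcases hc : cand h w p d with _ | q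
    · obtain ⟨L, heq, hnd, hmem, hcomp⟩ := ih vis stk
      refine ⟨L, by simpa [List.foldl_cons, tryPushA, hc] using heq, hnd, ?_, ?_⟩
      · intro q hq; obtain ⟨h1, h2, h3, h4, d', hd', h5⟩ := hmem q hq
        exact ⟨h1, h2, h3, h4, d', List.mem_cons_of_mem _ hd', h5⟩
      · intro d' hd' q hq hbg
        rcases List.mem_cons.mp hd' with rfl | hd'
        · rw [hc] at hq; exact absurd hq (by simp)
        · exact hcomp d' hd' q hq hbg
    · by_cases hacc : ¬ q ∈ vis ∧ cellv g q.1 q.2 ≠ bg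
      · obtain ⟨L, heq, hnd, hmem, hcomp⟩ := ih (q :: vis) (q :: stk)
        have hb : q.1 < h ∧ q.2 < w := by
          unfold cand at hc; split at hc
          · cases hc; constructor <;> simp <;> omega
          · cases hc
        refine ⟨L ++ [q], ?_, ?_, ?_, ?_⟩
        · simpa [List.foldl_cons, tryPushA, hc, hacc] using heq
        · have : q ∉ L := fun hqL => (hmem q hqL).1 (by simp)
          simp [List.nodup_append, hnd, this]
          exact fun a b hab hEq => this (hEq ▸ hab)
        · intro q' hq'
          rcases List.mem_append.mp hq' with hq' | hq'
          · obtain ⟨h1, h2, h3, h4, d', hd', h5⟩ := hmem q' hq'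
            exact ⟨fun hv => h1 (by simp [hv]), h2, h3, h4, d', List.mem_cons_of_mem _ hd', h5⟩
          · simp at hq'; subst hq'
            exact ⟨hacc.1, hb.1, hb.2, hacc.2, d, by simp, hc⟩
        · intro d' hd' q' hq' hbg
          rcases List.mem_cons.mp hd' with rfl | hd'
          · rw [hc] at hq'; cases hq'; simp
          · have := hcomp d' hd' q' hq' hbg
            simp at this ⊢; tauto
      · obtain ⟨L, heq, hnd, hmem, hcomp⟩ := ih vis stk
        refine ⟨L, by simpa [List.foldl_cons, tryPushA, hc, hacc] using heq, hnd, ?_, ?_⟩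
        · intro q' hq'; obtain ⟨h1, h2, h3, h4, d', hd', h5⟩ := hmem q' hq'
          exact ⟨h1, h2, h3, h4, d', List.mem_cons_of_mem _ hd', h5⟩
        · intro d' hd' q' hq' hbg
          rcases List.mem_cons.mp hd' with rfl | hd'
          · rw [hc] at hq'; cases hq'
            rcases Decidable.not_and_iff_or_not.mp hacc with hv | hbg'
            · simp at hv; exact List.mem_append_right _ hv
            · exact absurd hbg (by simpa using hbg')
          · exact hcomp d' hd' q' hq' hbg

-- A's DFS flood-fill loop: pop the stack top, record the cell, push unvisited non-bg neighbours
def dfsA (g : List (List Int)) (bg : Int) (h w : Nat)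
    (vis : List (Nat × Nat)) (stk : List (Nat × Nat)) (obj : List ((Nat × Nat) × Int)) :
    List (Nat × Nat) × List ((Nat × Nat) × Int) :=
  match stk with
  | [] => (vis, obj)
  | p :: rest =>
      let st := dsA.foldl (tryPushA g bg h w p) (vis, rest)
      dfsA g bg h w st.1 st.2 (obj ++ [(p, cellv g p.1 p.2)])
termination_by (unvis h w vis, stk.length)
decreasing_by
  obtain ⟨L, heq, hnd, hmem, -⟩ := pushA_spec g bg h w p dsA vis rest
  simp only [st, heq]
  cases L with
  | nil => simp; exact Prod.Lex.right _ (by omega)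
  | cons q L' =>
    exact Prod.Lex.left _ _ (unvis_lt (q := q) (by simp) ((hmem q (by simp)).1)
      ⟨(hmem q (by simp)).2.1, (hmem q (by simp)).2.2.1⟩)

-- column-max of an object (Python's max(c for r,c,v in obj); [] never reached)
def maxColA (obj : List ((Nat × Nat) × Int)) : Nat :=
  match obj with
  | [] => 0
  | e :: t => t.foldl (fun m e' => max m e'.1.2) e.1.2

def upd2 (m : List (List Int)) (r c : Nat) (v : Int) : List (List Int) :=
  m.set r ((m.getD r []).set c v)

-- phase 2 of A: write one object shifted to the right edge (with A's bounds guard)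
def writeCompA (w : Nat) (res : List (List Int)) (obj : List ((Nat × Nat) × Int)) : List (List Int) :=
  obj.foldl (fun res e =>
    if 0 ≤ (e.1.2 : Int) + ((w : Int) - 1 - (maxColA obj : Int)) ∧
       (e.1.2 : Int) + ((w : Int) - 1 - (maxColA obj : Int)) < (w : Int)
    then upd2 res e.1.1 ((e.1.2 : Int) + ((w : Int) - 1 - (maxColA obj : Int))).toNat e.2
    else res) res

-- outer scan step of A: seed an unvisited non-bg cell, flood it, append the object
def stepA (g : List (List Int)) (bg : Int) (h w : Nat)
    (st : List (Nat × Nat) × List (List ((Nat × Nat) × Int))) (p : Nat × Nat) :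
    List (Nat × Nat) × List (List ((Nat × Nat) × Int)) :=
  if p ∈ st.1 ∨ cellv g p.1 p.2 = bg then st
  else
    let pr := dfsA g bg h w (p :: st.1) [p] []
    (pr.1, st.2 ++ [pr.2])

def move_all_to_right (g : List (List Int)) : List (List Int) :=
  let bg := bgOf g
  let h := g.length
  let w := (g.headD []).length
  let objs := ((List.range h).foldl (fun st r =>
      (List.range w).foldl (fun st c => stepA g bg h w st (r, c)) st)
      (([], []) : List (Nat × Nat) × List (List ((Nat × Nat) × Int)))).2
  if objs = [] then g
  else objs.foldl (writeCompA w) (List.replicate h (List.replicate w bg))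

-- ===== PORT B =====

-- parent.get(x) (only ever read on keys; default x makes the lookup total)
def prUF (d : PySem.Dict (Nat × Nat) (Nat × Nat)) (x : Nat × Nat) : Nat × Nat := d.getD x x

-- Source B's  'while parent[x] != x: x = parent[x]'  ported with fuel = dict size;
-- exact whenever the parent chains are acyclic, which the build below guarantees
def findUF (d : PySem.Dict (Nat × Nat) (Nat × Nat)) : Nat → (Nat × Nat) → (Nat × Nat)
  | 0, x => x
  | fuel + 1, x => if prUF d x = x then x else findUF d fuel (prUF d x)

def ufFind (d : PySem.Dict (Nat × Nat) (Nat × Nat)) (x : Nat × Nat) : Nat × Nat :=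
  findUF d d.items.length x

-- union(a, b): link root of a to root of b
def unionUF (d : PySem.Dict (Nat × Nat) (Nat × Nat)) (a b : Nat × Nat) :
    PySem.Dict (Nat × Nat) (Nat × Nat) :=
  let ra := ufFind d a
  let rb := ufFind d b
  if ra ≠ rb then d.insert ra rb else d

-- parent.setdefault(p, p)
def sdUF (d : PySem.Dict (Nat × Nat) (Nat × Nat)) (p : Nat × Nat) :
    PySem.Dict (Nat × Nat) (Nat × Nat) := d.setdefault p p

-- Source B's 'if c+1 < w and g[r][c+1] != bg: ...' block
def buildStepR (g : List (List Int)) (bg : Int) (w : Nat)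
    (d : PySem.Dict (Nat × Nat) (Nat × Nat)) (p : Nat × Nat) :
    PySem.Dict (Nat × Nat) (Nat × Nat) :=
  if p.2 + 1 < w ∧ cellv g p.1 (p.2 + 1) ≠ bg then
    unionUF (sdUF d (p.1, p.2 + 1)) p (p.1, p.2 + 1) else d

-- Source B's 'if r+1 < h and g[r+1][c] != bg: ...' block
def buildStepD (g : List (List Int)) (bg : Int) (h : Nat)
    (d : PySem.Dict (Nat × Nat) (Nat × Nat)) (p : Nat × Nat) :
    PySem.Dict (Nat × Nat) (Nat × Nat) :=
  if p.1 + 1 < h ∧ cellv g (p.1 + 1) p.2 ≠ bg then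
    unionUF (sdUF d (p.1 + 1, p.2)) p (p.1 + 1, p.2) else d

-- body of Source B's build loop at cell p: init p, union with right and down non-bg neighbours
def buildStep (g : List (List Int)) (bg : Int) (h w : Nat)
    (d : PySem.Dict (Nat × Nat) (Nat × Nat)) (p : Nat × Nat) :
    PySem.Dict (Nat × Nat) (Nat × Nat) :=
  if cellv g p.1 p.2 = bg then d
  else buildStepD g bg h (buildStepR g bg w (sdUF d p) p) p

-- body of Source B's bucketing loop: comps.setdefault(find(p), []).append((r, c, v))
def compStep (g : List (List Int)) (bg : Int) (d : PySem.Dict (Nat × Nat) (Nat × Nat))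
    (cm : PySem.Dict (Nat × Nat) (List ((Nat × Nat) × Int))) (p : Nat × Nat) :
    PySem.Dict (Nat × Nat) (List ((Nat × Nat) × Int)) :=
  if cellv g p.1 p.2 ≠ bg then
    cm.modify (ufFind d p) [] (· ++ [(p, cellv g p.1 p.2)])
  else cm

-- Source B's write pass for one bucket (no bounds guard)
def writeCompB (w : Nat) (res : List (List Int)) (obj : List ((Nat × Nat) × Int)) :
    List (List Int) :=
  obj.foldl (fun res e =>
    upd2 res e.1.1 ((e.1.2 : Int) + ((w : Int) - 1 - (maxColA obj : Int))).toNat e.2) res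

def move_all_to_right_alt (g : List (List Int)) : List (List Int) :=
  let bg := bgOf g
  let h := g.length
  let w := (g.headD []).length
  let d := (List.range h).foldl (fun d r =>
      (List.range w).foldl (fun d c => buildStep g bg h w d (r, c)) d) PySem.Dict.empty
  let cm := (List.range h).foldl (fun cm r =>
      (List.range w).foldl (fun cm c => compStep g bg d cm (r, c)) cm) PySem.Dict.empty
  if cm.items = [] then g
  else cm.items.foldl (fun res kv => writeCompB w res kv.2)
    (List.replicate h (List.replicate w bg))

-- ===== PRECONDITION & SPEC =====
-- Pre_ excludes exactly the inputs on which the Python A raises IndexError: grids whose rows are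
-- all empty (Counter().most_common(1)[0] fails) and grids with a row shorter than len(g[0])
-- (out-of-range column read g[r][c]).
def Pre_move_all_to_right (g : List (List Int)) : Prop :=
  (∃ row ∈ g, row ≠ []) ∧ ∀ row ∈ g, (g.headD []).length ≤ row.length
instance (g : List (List Int)) : Decidable (Pre_move_all_to_right g) := by
  unfold Pre_move_all_to_right; infer_instance
def pvWitness_move_all_to_right : List (List Int) := [[1, 0], [0, 2]]
def Spec_move_all_to_right (g : List (List Int)) (out : List (List Int)) : Prop :=
  out = move_all_to_right_alt g
instance (g : List (List Int)) (out : List (List Int)) : Decidable (Spec_move_all_to_right g out) := by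
  unfold Spec_move_all_to_right; infer_instance

-- ===== CLAIM (what is proved, stated in full; the proofs are below) =====
def Claim_equal_move_all_to_right : Prop :=
  ∀ (g : List (List Int)), Dom_move_all_to_right g → Pre_move_all_to_right g →
    Spec_move_all_to_right g (move_all_to_right g)

-- ===== LEMMAS AND PROOFS =====

-- 4-neighbour adjacency
def adjP (p q : Nat × Nat) : Prop :=
  (p.1 = q.1 ∧ (p.2 + 1 = q.2 ∨ q.2 + 1 = p.2)) ∨ (p.2 = q.2 ∧ (p.1 + 1 = q.1 ∨ q.1 + 1 = p.1))

def okP (g : List (List Int)) (bg : Int) (h w : Nat) (q : Nat × Nat) : Prop :=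
  q.1 < h ∧ q.2 < w ∧ cellv g q.1 q.2 ≠ bg

-- cells reachable from the seed s through in-bounds non-bg cells avoiding vis0
inductive Reach (g : List (List Int)) (bg : Int) (h w : Nat)
    (vis0 : List (Nat × Nat)) (s : Nat × Nat) : (Nat × Nat) → Prop
  | base : Reach g bg h w vis0 s s
  | step {p q : Nat × Nat} : Reach g bg h w vis0 s p → adjP p q → okP g bg h w q →
      ¬ q ∈ vis0 → Reach g bg h w vis0 s q

-- connectivity between in-bounds non-bg cells (the common reference of both ports)
inductive Conn (g : List (List Int)) (bg : Int) (h w : Nat) : (Nat × Nat) → (Nat × Nat) → Prop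
  | refl (p : Nat × Nat) : okP g bg h w p → Conn g bg h w p p
  | tail {p q r : Nat × Nat} : Conn g bg h w p q → adjP q r → okP g bg h w r →
      Conn g bg h w p r

lemma adjP_symm {p q : Nat × Nat} (h : adjP p q) : adjP q p := by
  unfold adjP at *; omega

lemma Conn_ok_left {g bg h w} {p q : Nat × Nat} (hc : Conn g bg h w p q) : okP g bg h w p := by
  induction hc with
  | refl hp => exact hp
  | tail _ _ _ ih => exact ih

lemma Conn_ok_right {g bg h w} {p q : Nat × Nat} (hc : Conn g bg h w p q) : okP g bg h w q := by
  cases hc with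
  | refl hp => exact hp
  | tail _ _ hr => exact hr

lemma Conn_trans {g bg h w} {p q r : Nat × Nat}
    (h1 : Conn g bg h w p q) (h2 : Conn g bg h w q r) : Conn g bg h w p r := by
  induction h2 with
  | refl _ => exact h1
  | tail _ ha hk ih => exact Conn.tail ih ha hk

lemma Conn_symm {g bg h w} {p q : Nat × Nat} (hc : Conn g bg h w p q) : Conn g bg h w q p := by
  induction hc with
  | refl hp => exact Conn.refl _ hp
  | tail hpq ha hr ih =>
    exact Conn_trans (Conn.tail (Conn.refl _ hr) (adjP_symm ha) (Conn_ok_right hpq)) ih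

lemma reach_to_conn {g bg h w vis0} {s q : Nat × Nat} (hs : okP g bg h w s)
    (hr : Reach g bg h w vis0 s q) : Conn g bg h w s q := by
  induction hr with
  | base => exact Conn.refl _ hs
  | step _ ha hq _ ih => exact Conn.tail ih ha hq

lemma conn_to_reach {g bg h w vis0} {s q : Nat × Nat}
    (hCC : ∀ x y, x ∈ vis0 → Conn g bg h w x y → y ∈ vis0) (hs : ¬ s ∈ vis0)
    (hc : Conn g bg h w s q) : Reach g bg h w vis0 s q := by
  induction hc with
  | refl _ => exact Reach.base
  | tail hpq ha hr ih =>
    refine Reach.step ih ha hr (fun hrv => hs ?_)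
    exact hCC _ _ hrv (Conn_symm (Conn.tail hpq ha hr))

lemma cand_adj {h w : Nat} {p q : Nat × Nat} {d : Int × Int} (hd : d ∈ dsA)
    (hc : cand h w p d = some q) : adjP p q ∧ q.1 < h ∧ q.2 < w := by
  fin_cases hd <;>
  · unfold cand at hc
    split at hc
    · cases hc
      refine ⟨?_, by simp <;> omega, by simp <;> omega⟩
      unfold adjP
      simp <;> omega
    · cases hc

lemma adj_cand {h w : Nat} {p q : Nat × Nat} (ha : adjP p q) (h1 : q.1 < h) (h2 : q.2 < w) :
    ∃ d ∈ dsA, cand h w p d = some q := by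
  obtain ⟨p1, p2⟩ := p
  obtain ⟨q1, q2⟩ := q
  simp only [adjP] at ha
  have mk : ∀ d : Int × Int, d ∈ dsA →
      (0 ≤ (p1 : Int) + d.1 ∧ (p1 : Int) + d.1 < (h : Int) ∧ 0 ≤ (p2 : Int) + d.2 ∧ (p2 : Int) + d.2 < (w : Int)) →
      ((p1 : Int) + d.1).toNat = q1 → ((p2 : Int) + d.2).toNat = q2 →
      ∃ d ∈ dsA, cand h w (p1, p2) d = some (q1, q2) := by
    intro d hd hcond e1 e2
    refine ⟨d, hd, ?_⟩
    unfold cand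
    rw [if_pos hcond]
    simp [e1, e2]
  rcases ha with ⟨h1', h2' | h2'⟩ | ⟨h1', h2' | h2'⟩
  · exact mk (0, 1) (by simp [dsA]) (by simp at h1' h2' ⊢; omega) (by simp at h1' h2' ⊢; omega) (by simp at h1' h2' ⊢; omega)
  · exact mk (0, -1) (by simp [dsA]) (by simp at h1' h2' ⊢; omega) (by simp at h1' h2' ⊢; omega) (by simp at h1' h2' ⊢; omega)
  · exact mk (1, 0) (by simp [dsA]) (by simp at h1' h2' ⊢; omega) (by simp at h1' h2' ⊢; omega) (by simp at h1' h2' ⊢; omega)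
  · exact mk (-1, 0) (by simp [dsA]) (by simp at h1' h2' ⊢; omega) (by simp at h1' h2' ⊢; omega) (by simp at h1' h2' ⊢; omega)

-- loop invariant of A's flood fill (oc = cells already output)
def LoopInv (g : List (List Int)) (bg : Int) (h w : Nat) (vis0 : List (Nat × Nat)) (s : Nat × Nat)
    (vis stk oc : List (Nat × Nat)) : Prop :=
  s ∈ vis ∧
  (∀ q ∈ stk, Reach g bg h w vis0 s q) ∧
  (∀ q ∈ oc, Reach g bg h w vis0 s q) ∧
  (∀ q, q ∈ vis ↔ q ∈ vis0 ∨ q ∈ oc ∨ q ∈ stk) ∧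
  (∀ p ∈ oc, ∀ q, adjP p q → okP g bg h w q → q ∈ vis) ∧
  (oc ++ stk).Nodup

lemma nodup_assemble {α : Type} {oc rest L : List α} {p : α}
    (hnd : (oc ++ p :: rest).Nodup) (hL : L.Nodup)
    (hdisj : ∀ q ∈ L, ¬ q ∈ oc ++ p :: rest) : (L ++ (oc ++ p :: rest)).Nodup :=
  List.nodup_append.mpr ⟨hL, hnd, fun a ha b hb hab => hdisj a ha (hab ▸ hb)⟩

lemma dfsA_spec (g : List (List Int)) (bg : Int) (h w : Nat) (vis0 : List (Nat × Nat))
    (s : Nat × Nat) (hs0 : ¬ s ∈ vis0) (hoks : okP g bg h w s) :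
    ∀ vis stk obj, LoopInv g bg h w vis0 s vis stk (obj.map Prod.fst) →
    (∀ e ∈ obj, e.2 = cellv g e.1.1 e.1.2) →
    (∀ q, q ∈ (dfsA g bg h w vis stk obj).1 ↔ q ∈ vis0 ∨ Reach g bg h w vis0 s q) ∧
    (∀ q, q ∈ (dfsA g bg h w vis stk obj).2.map Prod.fst ↔ Reach g bg h w vis0 s q) ∧
    ((dfsA g bg h w vis stk obj).2.map Prod.fst).Nodup ∧
    (∀ e ∈ (dfsA g bg h w vis stk obj).2, e.2 = cellv g e.1.1 e.1.2) := by
  intro vis stk obj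
  induction vis, stk, obj using dfsA.induct g bg h w with
  | case1 vis obj =>
    intro hInv hvals
    obtain ⟨hsvis, hstk, hoc, hiff, hcl, hnd⟩ := hInv
    have hocr : ∀ q, q ∈ obj.map Prod.fst ↔ Reach g bg h w vis0 s q := by
      intro q
      constructor
      · exact hoc q
      · intro hr
        induction hr with
        | base =>
          rcases (hiff s).mp hsvis with h | h | h
          · exact absurd h hs0
          · exact h
          · simp at h
        | step hp ha hq hnv ih =>
          rcases (hiff _).mp (hcl _ ih _ ha hq) with h | h | h
          · exact absurd h hnv
          · exact h
          · simp at h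
    rw [dfsA]
    refine ⟨?_, hocr, by simpa using hnd, hvals⟩
    intro q
    rw [hiff q, ← hocr q]
    simp
    try tauto
  | case2 vis obj p rest st ih =>
    intro hInv hvals
    obtain ⟨hsvis, hstk, hoc, hiff, hcl, hnd⟩ := hInv
    obtain ⟨L, heq, hLnd, hmem, hcomp⟩ := pushA_spec g bg h w p dsA vis rest
    have hReach_p : Reach g bg h w vis0 s p := hstk p (by simp)
    have hLfacts : ∀ q ∈ L, Reach g bg h w vis0 s q ∧ okP g bg h w q ∧ ¬ q ∈ vis := by
      intro q hq
      obtain ⟨hnv, hb1, hb2, hbg, d, hd, hcand⟩ := hmem q hq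
      have hadj := cand_adj hd hcand
      have hok : okP g bg h w q := ⟨hb1, hb2, hbg⟩
      have hnv0 : ¬ q ∈ vis0 := fun hx => hnv ((hiff q).mpr (Or.inl hx))
      exact ⟨Reach.step hReach_p hadj.1 hok hnv0, hok, hnv⟩
    have hInv' : LoopInv g bg h w vis0 s (L ++ vis) (L ++ rest)
        ((obj ++ [(p, cellv g p.1 p.2)]).map Prod.fst) := by
      have hmapnew : (obj ++ [(p, cellv g p.1 p.2)]).map Prod.fst = obj.map Prod.fst ++ [p] := by
        simp
      rw [hmapnew]
      refine ⟨List.mem_append_right _ hsvis, ?_, ?_, ?_, ?_, ?_⟩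
      · intro q hq
        rcases List.mem_append.mp hq with hq | hq
        · exact (hLfacts q hq).1
        · exact hstk q (by simp [hq])
      · intro q hq
        rcases List.mem_append.mp hq with hq | hq
        · exact hoc q hq
        · simp at hq; subst hq; exact hReach_p
      · intro q
        rw [List.mem_append, List.mem_append, List.mem_append, hiff q]
        simp
        tauto
      · intro p' hp' q hadj hok
        rcases List.mem_append.mp hp' with hp' | hp'
        · exact List.mem_append_right _ (hcl p' hp' q hadj hok)
        · simp at hp'; subst hp'
          obtain ⟨d, hd, hcand⟩ := adj_cand hadj hok.1 hok.2.1
          exact hcomp d hd q hcand hok.2.2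
      · have hdisj : ∀ q ∈ L, ¬ q ∈ obj.map Prod.fst ++ p :: rest := by
          intro q hq hmem'
          apply (hLfacts q hq).2.2
          apply (hiff q).mpr
          rcases List.mem_append.mp hmem' with h | h
          · exact Or.inr (Or.inl h)
          · exact Or.inr (Or.inr h)
        have hbase := nodup_assemble hnd hLnd hdisj
        have hperm : List.Perm ((obj.map Prod.fst ++ [p]) ++ (L ++ rest))
            (L ++ (obj.map Prod.fst ++ p :: rest)) := by
          have h1 : (obj.map Prod.fst ++ [p]) ++ (L ++ rest)
              = ((obj.map Prod.fst ++ [p]) ++ L) ++ rest := by simp [List.append_assoc]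
          have h3 : List.Perm (((obj.map Prod.fst ++ [p]) ++ L) ++ rest)
              ((L ++ (obj.map Prod.fst ++ [p])) ++ rest) :=
            (List.perm_append_comm).append_right rest
          have h4 : (L ++ (obj.map Prod.fst ++ [p])) ++ rest
              = L ++ (obj.map Prod.fst ++ p :: rest) := by simp [List.append_assoc]
          rw [h1]
          exact h4 ▸ h3
        exact hperm.symm.nodup hbase
    have hvals' : ∀ e ∈ obj ++ [(p, cellv g p.1 p.2)], e.2 = cellv g e.1.1 e.1.2 := by
      intro e he
      rcases List.mem_append.mp he with he | he
      · exact hvals e he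
      · simp at he; subst he; rfl
    simp only [st, heq] at ih
    have hres := ih hInv' hvals'
    rw [dfsA]
    simp only [heq]
    exact hres

-- ---------- union-find correctness ----------

-- parent chain from x down to its root r, listing the visited nodes
inductive ChainUF (d : PySem.Dict (Nat × Nat) (Nat × Nat)) :
    (Nat × Nat) → List (Nat × Nat) → (Nat × Nat) → Prop
  | root (r : Nat × Nat) : prUF d r = r → ChainUF d r [r] r
  | step {x : Nat × Nat} {l : List (Nat × Nat)} {r : Nat × Nat} :
      prUF d x ≠ x → ChainUF d (prUF d x) l r → ChainUF d x (x :: l) r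

lemma chain_root_self {d x l r} (hc : ChainUF d x l r) : prUF d r = r := by
  induction hc with
  | root _ hr => exact hr
  | step _ _ ih => exact ih

lemma chain_from_root {d x l r} (hx : prUF d x = x) (hc : ChainUF d x l r) :
    r = x ∧ l = [x] := by
  cases hc with
  | root _ _ => exact ⟨rfl, rfl⟩
  | step hne _ => exact absurd hx hne

lemma chain_root_mem {d x l r} (hc : ChainUF d x l r) : r ∈ l := by
  induction hc with
  | root _ _ => simp
  | step _ _ ih => exact List.mem_cons_of_mem _ ih

lemma chain_suffix {d x l r} (hc : ChainUF d x l r) :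
    ∀ a ∈ l, ∃ l', ChainUF d a l' r := by
  induction hc with
  | root r hr =>
    intro a ha
    have he : a = r := by simpa using ha
    exact ⟨[r], by rw [he]; exact ChainUF.root r hr⟩
  | step hne hch ih =>
    intro a ha
    rcases List.mem_cons.mp ha with rfl | ha
    · exact ⟨_, ChainUF.step hne hch⟩
    · exact ih a ha

lemma findUF_eq {d x l r} (hc : ChainUF d x l r) :
    ∀ {fuel : Nat}, l.length ≤ fuel → findUF d fuel x = r := by
  induction hc with
  | root r hr =>
    intro fuel hf
    cases fuel with
    | zero => simp at hf
    | succ n => simp [findUF, hr]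
  | step hne hch ih =>
    intro fuel hf
    cases fuel with
    | zero => simp at hf
    | succ n =>
      simp only [findUF, if_neg hne]
      exact ih (by simpa using hf)

lemma chain_congr {d d' : PySem.Dict (Nat × Nat) (Nat × Nat)} :
    ∀ {x l r}, ChainUF d x l r → (∀ a ∈ l, prUF d' a = prUF d a) → ChainUF d' x l r := by
  intro x l r hc
  induction hc with
  | root r hr =>
    intro hpr
    exact ChainUF.root r ((hpr r (by simp)).trans hr)
  | step hne hch ih =>
    intro hpr
    rename_i x' l' r'
    have hx : prUF d' x' = prUF d x' := hpr x' (by simp)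
    refine ChainUF.step (by rw [hx]; exact hne) ?_
    rw [hx]
    exact ih (fun a ha => hpr a (by simp [ha]))

lemma chain_len_le {keys l : List (Nat × Nat)} (hnd : l.Nodup) (hsub : ∀ a ∈ l, a ∈ keys)
    (hknd : keys.Nodup) : l.length ≤ keys.length := by
  have h1 : l.toFinset.card = l.length := List.toFinset_card_of_nodup hnd
  have h2 : keys.toFinset.card = keys.length := List.toFinset_card_of_nodup hknd
  have h3 : l.toFinset ⊆ keys.toFinset := by
    intro a ha
    simpa using hsub a (by simpa using ha)
  have h4 := Finset.card_le_card h3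
  omega

-- the union-find invariant: keys unique, relation endpoints are keys, every key has a
-- finite acyclic parent chain, and ufFind classifies exactly the generated equivalence
def UFInv (d : PySem.Dict (Nat × Nat) (Nat × Nat))
    (R : (Nat × Nat) → (Nat × Nat) → Prop) : Prop :=
  d.keys.Nodup ∧
  (∀ x y, R x y → x ∈ d.keys ∧ y ∈ d.keys) ∧
  (∀ x ∈ d.keys, ∃ l r, ChainUF d x l r ∧ l.Nodup ∧ (∀ a ∈ l, a ∈ d.keys)) ∧
  (∀ x ∈ d.keys, ∀ y ∈ d.keys, (ufFind d x = ufFind d y ↔ Relation.EqvGen R x y))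

lemma keys_len_items (d : PySem.Dict (Nat × Nat) (Nat × Nat)) :
    d.keys.length = d.items.length := by
  simp [PySem.Dict.keys]

lemma ufFind_of_chain {d : PySem.Dict (Nat × Nat) (Nat × Nat)} {x l r}
    (hnd : d.keys.Nodup) (hc : ChainUF d x l r) (hlnd : l.Nodup)
    (hsub : ∀ a ∈ l, a ∈ d.keys) : ufFind d x = r := by
  refine findUF_eq hc ?_
  rw [← keys_len_items]
  exact chain_len_le hlnd hsub hnd

lemma eqv_occurs {α : Type} {R : α → α → Prop} {u v : α} (h : Relation.EqvGen R u v) :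
    u = v ∨ ((∃ z, R u z ∨ R z u) ∧ (∃ z, R v z ∨ R z v)) := by
  induction h with
  | rel x y hxy => exact Or.inr ⟨⟨y, Or.inl hxy⟩, ⟨x, Or.inr hxy⟩⟩
  | refl x => exact Or.inl rfl
  | symm x y _ ih =>
    rcases ih with rfl | hx
    · exact Or.inl rfl
    · exact Or.inr ⟨hx.2, hx.1⟩
  | trans x y z _ _ ih1 ih2 =>
    rcases ih1 with rfl | h1
    · exact ih2
    · rcases ih2 with rfl | h2
      · exact Or.inr h1
      · exact Or.inr ⟨h1.1, h2.2⟩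

lemma eqv_mono {α : Type} {R R' : α → α → Prop} (h : ∀ x y, R x y → R' x y) {u v : α}
    (he : Relation.EqvGen R u v) : Relation.EqvGen R' u v := by
  induction he with
  | rel x y hxy => exact Relation.EqvGen.rel _ _ (h _ _ hxy)
  | refl x => exact Relation.EqvGen.refl x
  | symm x y _ ih => exact Relation.EqvGen.symm _ _ ih
  | trans x y z _ _ ih1 ih2 => exact Relation.EqvGen.trans _ _ _ ih1 ih2

lemma eqv_congr {α : Type} {R R' : α → α → Prop} (h : ∀ x y, R x y ↔ R' x y) (u v : α) :
    Relation.EqvGen R u v ↔ Relation.EqvGen R' u v :=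
  ⟨eqv_mono (fun x y => (h x y).mp), eqv_mono (fun x y => (h x y).mpr)⟩

lemma eqv_add_pair {α : Type} {R : α → α → Prop} (a b : α) (u v : α) :
    Relation.EqvGen (fun x y => R x y ∨ (x = a ∧ y = b)) u v ↔
      Relation.EqvGen R u v ∨
      (Relation.EqvGen R u a ∧ Relation.EqvGen R b v) ∨
      (Relation.EqvGen R u b ∧ Relation.EqvGen R a v) := by
  constructor
  · intro h
    induction h with
    | rel x y hxy =>
      rcases hxy with hxy | ⟨rfl, rfl⟩
      · exact Or.inl (Relation.EqvGen.rel _ _ hxy)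
      · exact Or.inr (Or.inl ⟨Relation.EqvGen.refl _, Relation.EqvGen.refl _⟩)
    | refl x => exact Or.inl (Relation.EqvGen.refl x)
    | symm x y _ ih =>
      rcases ih with h1 | ⟨h1, h2⟩ | ⟨h1, h2⟩
      · exact Or.inl (Relation.EqvGen.symm _ _ h1)
      · exact Or.inr (Or.inr ⟨Relation.EqvGen.symm _ _ h2, Relation.EqvGen.symm _ _ h1⟩)
      · exact Or.inr (Or.inl ⟨Relation.EqvGen.symm _ _ h2, Relation.EqvGen.symm _ _ h1⟩)
    | trans x y z _ _ ih1 ih2 =>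
      rcases ih1 with h1 | ⟨h1, h1'⟩ | ⟨h1, h1'⟩ <;>
        rcases ih2 with h2 | ⟨h2, h2'⟩ | ⟨h2, h2'⟩
      · exact Or.inl (Relation.EqvGen.trans _ _ _ h1 h2)
      · exact Or.inr (Or.inl ⟨Relation.EqvGen.trans _ _ _ h1 h2, h2'⟩)
      · exact Or.inr (Or.inr ⟨Relation.EqvGen.trans _ _ _ h1 h2, h2'⟩)
      · exact Or.inr (Or.inl ⟨h1, Relation.EqvGen.trans _ _ _ h1' h2⟩)
      · exact Or.inr (Or.inl ⟨h1, h2'⟩)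
      · exact Or.inl (Relation.EqvGen.trans _ _ _ h1 h2')
      · exact Or.inr (Or.inr ⟨h1, Relation.EqvGen.trans _ _ _ h1' h2⟩)
      · exact Or.inl (Relation.EqvGen.trans _ _ _ h1 h2')
      · exact Or.inr (Or.inr ⟨h1, h2'⟩)
  · intro h
    have hbase : Relation.EqvGen (fun x y => R x y ∨ (x = a ∧ y = b)) a b :=
      Relation.EqvGen.rel _ _ (Or.inr ⟨rfl, rfl⟩)
    have hmono : ∀ {u v : α}, Relation.EqvGen R u v →
        Relation.EqvGen (fun x y => R x y ∨ (x = a ∧ y = b)) u v :=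
      fun h' => eqv_mono (fun x y hx => Or.inl hx) h'
    rcases h with h1 | ⟨h1, h2⟩ | ⟨h1, h2⟩
    · exact hmono h1
    · exact Relation.EqvGen.trans _ _ _ (Relation.EqvGen.trans _ _ _ (hmono h1) hbase) (hmono h2)
    · exact Relation.EqvGen.trans _ _ _ (Relation.EqvGen.trans _ _ _ (hmono h1)
        (Relation.EqvGen.symm _ _ hbase)) (hmono h2)

lemma UFInv_congr {d R R'} (h : ∀ x y, R x y ↔ R' x y) (hI : UFInv d R) : UFInv d R' := by
  obtain ⟨h1, h2, h3, h4⟩ := hI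
  exact ⟨h1, fun x y hxy => h2 x y ((h x y).mpr hxy), h3,
    fun x hx y hy => (h4 x hx y hy).trans (eqv_congr h x y)⟩

lemma sd_inv {d R} (hI : UFInv d R) (p : Nat × Nat) :
    UFInv (sdUF d p) R ∧
    (∀ x, x ∈ (sdUF d p).keys ↔ x = p ∨ x ∈ d.keys) ∧
    p ∈ (sdUF d p).keys ∧
    (∀ x ∈ d.keys, x ∈ (sdUF d p).keys) := by
  obtain ⟨hnd, hR, hch, hiff⟩ := hI
  by_cases hc : d.contains p = true
  · have hd : sdUF d p = d := by
      unfold sdUF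
      exact PySem.Dict.setdefault_of_contains d p hc
    have hpk : p ∈ d.keys := by
      rw [PySem.Dict.contains_eq_decide_mem_keys] at hc
      simpa using hc
    rw [hd]
    exact ⟨⟨hnd, hR, hch, hiff⟩, fun x => ⟨fun hx => Or.inr hx,
      fun hx => hx.elim (fun he => he ▸ hpk) id⟩, hpk, fun x hx => hx⟩
  · have hcf : d.contains p = false := by simpa using hc
    have hd : sdUF d p = d.insert p p := by
      unfold sdUF
      exact PySem.Dict.setdefault_of_not_contains d p hcf
    have hpk : ¬ p ∈ d.keys := by
      rw [PySem.Dict.contains_eq_decide_mem_keys] at hcf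
      simpa using hcf
    rw [hd]
    have hkeys' : (d.insert p p).keys = d.keys ++ [p] := by
      have := PySem.Dict.items_insert_of_not_contains d (k := p) p hcf
      simp [PySem.Dict.keys, this]
    have hnd' : (d.insert p p).keys.Nodup := by
      rw [hkeys']
      refine List.nodup_append.mpr ⟨hnd, by simp, ?_⟩
      intro a ha b hb hab
      simp at hb
      exact hpk ((hab.trans hb) ▸ ha)
    have hpr : ∀ x, prUF (d.insert p p) x = if x = p then p else prUF d x := by
      intro x
      unfold prUF
      rw [PySem.Dict.getD_insert]
    have hfold : ∀ x ∈ d.keys, ufFind (d.insert p p) x = ufFind d x ∧ ufFind d x ∈ d.keys := by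
      intro x hx
      obtain ⟨l, r, hcx, hlnd, hsub⟩ := hch x hx
      have hsub' : ∀ a ∈ l, a ∈ (d.insert p p).keys := by
        intro a ha
        rw [hkeys']
        exact List.mem_append_left _ (hsub a ha)
      have hcx' : ChainUF (d.insert p p) x l r :=
        chain_congr hcx (fun a ha => by
          rw [hpr a, if_neg (fun he => hpk (by rw [← he]; exact hsub a ha))])
      rw [ufFind_of_chain hnd' hcx' hlnd hsub', ufFind_of_chain hnd hcx hlnd hsub]
      exact ⟨rfl, hsub r (chain_root_mem hcx)⟩
    have hfp : ufFind (d.insert p p) p = p := by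
      have hroot : prUF (d.insert p p) p = p := by rw [hpr]; simp
      refine ufFind_of_chain hnd' (ChainUF.root p hroot) (by simp) ?_
      intro a ha
      simp at ha
      subst ha
      rw [hkeys']
      simp
    refine ⟨⟨hnd', ?_, ?_, ?_⟩, ?_, ?_, ?_⟩
    · intro x y hxy
      obtain ⟨h1, h2⟩ := hR x y hxy
      rw [hkeys']
      exact ⟨List.mem_append_left _ h1, List.mem_append_left _ h2⟩
    · intro x hx
      rw [hkeys'] at hx
      rcases List.mem_append.mp hx with hx | hx
      · obtain ⟨l, r, hcx, hlnd, hsub⟩ := hch x hx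
        refine ⟨l, r, chain_congr hcx (fun a ha => by
          rw [hpr a, if_neg (fun he => hpk (by rw [← he]; exact hsub a ha))]), hlnd, ?_⟩
        intro a ha
        rw [hkeys']
        exact List.mem_append_left _ (hsub a ha)
      · simp at hx
        subst hx
        refine ⟨[x], x, ChainUF.root x (by rw [hpr]; simp), by simp, ?_⟩
        intro a ha
        simp at ha
        subst ha
        rw [hkeys']
        simp
    · intro x hx y hy
      rw [hkeys'] at hx hy
      rcases List.mem_append.mp hx with hx | hx <;> rcases List.mem_append.mp hy with hy | hy
      · rw [(hfold x hx).1, (hfold y hy).1]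
        exact hiff x hx y hy
      · simp at hy
        rw [hy]
        rw [(hfold x hx).1, hfp]
        constructor
        · intro he
          exact absurd (he ▸ (hfold x hx).2) hpk
        · intro he
          rcases eqv_occurs he with heq | ⟨-, ⟨z, hz⟩⟩
          · exact absurd (by rw [← heq]; exact hx) hpk
          · rcases hz with hz | hz
            · exact absurd (hR _ _ hz).1 hpk
            · exact absurd (hR _ _ hz).2 hpk
      · simp at hx
        rw [hx]
        rw [(hfold y hy).1, hfp]
        constructor
        · intro he
          exact absurd (he ▸ (hfold y hy).2) hpk
        · intro he
          rcases eqv_occurs he with heq | ⟨⟨z, hz⟩, -⟩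
          · exact absurd (by rw [heq]; exact hy) hpk
          · rcases hz with hz | hz
            · exact absurd (hR _ _ hz).1 hpk
            · exact absurd (hR _ _ hz).2 hpk
      · simp at hx hy
        rw [hx, hy]
        simp [Relation.EqvGen.refl]
    · intro x
      rw [hkeys']
      simp [or_comm]
    · rw [hkeys']
      simp
    · intro x hx
      rw [hkeys']
      exact List.mem_append_left _ hx

lemma chain_relink {d : PySem.Dict (Nat × Nat) (Nat × Nat)} {ra rb : Nat × Nat}
    (hne : ra ≠ rb) (hra : prUF d ra = ra) (hrb : prUF d rb = rb)
    (hpr : ∀ x, prUF (d.insert ra rb) x = if x = ra then rb else prUF d x) :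
    ∀ {x l r}, ChainUF d x l r → r = ra → ChainUF (d.insert ra rb) x (l ++ [rb]) rb := by
  intro x l r hc
  induction hc with
  | root r0 hr0 =>
    intro hre
    refine ChainUF.step ?_ ?_
    · rw [hpr, if_pos hre]
      intro he
      exact hne (hre ▸ he.symm)
    · rw [hpr, if_pos hre]
      refine ChainUF.root rb ?_
      rw [hpr, if_neg (fun he => hne he.symm)]
      exact hrb
  | step hne0 hch ih =>
    intro hre
    rename_i x' l' r'
    have hxra : x' ≠ ra := fun he => hne0 (by rw [he]; exact hra)
    refine ChainUF.step ?_ ?_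
    · rw [hpr, if_neg hxra]
      exact hne0
    · rw [hpr, if_neg hxra]
      exact ih hre

lemma union_inv {d R} (hI : UFInv d R) {a b : Nat × Nat}
    (ha : a ∈ d.keys) (hb : b ∈ d.keys) :
    UFInv (unionUF d a b) (fun x y => R x y ∨ (x = a ∧ y = b)) ∧
    (unionUF d a b).keys = d.keys := by
  obtain ⟨hnd, hR, hch, hiff⟩ := hI
  obtain ⟨la, ra, hca, hlnda, hsuba⟩ := hch a ha
  obtain ⟨lb, rb, hcb, hlndb, hsubb⟩ := hch b hb
  have hfa : ufFind d a = ra := ufFind_of_chain hnd hca hlnda hsuba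
  have hfb : ufFind d b = rb := ufFind_of_chain hnd hcb hlndb hsubb
  have hra_root : prUF d ra = ra := chain_root_self hca
  have hrb_root : prUF d rb = rb := chain_root_self hcb
  have hra_k : ra ∈ d.keys := hsuba ra (chain_root_mem hca)
  have hrb_k : rb ∈ d.keys := hsubb rb (chain_root_mem hcb)
  by_cases heq : ra = rb
  · have hd : unionUF d a b = d := by
      unfold unionUF
      rw [hfa, hfb]
      simp [heq]
    have hab : Relation.EqvGen R a b := (hiff a ha b hb).mp (by rw [hfa, hfb, heq])
    rw [hd]
    refine ⟨⟨hnd, ?_, hch, ?_⟩, rfl⟩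
    · rintro x y (hxy | ⟨rfl, rfl⟩)
      · exact hR x y hxy
      · exact ⟨ha, hb⟩
    · intro x hx y hy
      rw [hiff x hx y hy, eqv_add_pair]
      constructor
      · exact Or.inl
      · rintro (h | ⟨h1, h2⟩ | ⟨h1, h2⟩)
        · exact h
        · exact Relation.EqvGen.trans _ _ _ (Relation.EqvGen.trans _ _ _ h1 hab) h2
        · exact Relation.EqvGen.trans _ _ _
            (Relation.EqvGen.trans _ _ _ h1 (Relation.EqvGen.symm _ _ hab)) h2
  · have hd : unionUF d a b = d.insert ra rb := by
      unfold unionUF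
      rw [hfa, hfb]
      simp [heq]
    have hcont : d.contains ra = true := by
      rw [PySem.Dict.contains_eq_decide_mem_keys]
      simpa using hra_k
    have hkeys' : (d.insert ra rb).keys = d.keys :=
      PySem.Dict.keys_insert_of_contains d rb hcont
    have hpr : ∀ x, prUF (d.insert ra rb) x = if x = ra then rb else prUF d x := by
      intro x
      unfold prUF
      rw [PySem.Dict.getD_insert]
    have hnd' : (d.insert ra rb).keys.Nodup := by rw [hkeys']; exact hnd
    -- new chains and the new root of every key
    have H : ∀ x ∈ d.keys,
        (∃ l r, ChainUF (d.insert ra rb) x l r ∧ l.Nodup ∧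
          (∀ c ∈ l, c ∈ (d.insert ra rb).keys)) ∧
        ufFind (d.insert ra rb) x = (if ufFind d x = ra then rb else ufFind d x) := by
      intro x hx
      obtain ⟨l, r, hc, hlnd, hsub⟩ := hch x hx
      have hfx : ufFind d x = r := ufFind_of_chain hnd hc hlnd hsub
      by_cases hr : r = ra
      · have hrbl : rb ∉ l := by
          intro hmem
          obtain ⟨l', hc'⟩ := chain_suffix hc rb hmem
          exact heq (by rw [← hr, (chain_from_root hrb_root hc').1])
        have hc' : ChainUF (d.insert ra rb) x (l ++ [rb]) rb :=
          chain_relink heq hra_root hrb_root hpr hc hr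
        have hlnd' : (l ++ [rb]).Nodup := by
          refine List.nodup_append.mpr ⟨hlnd, by simp, ?_⟩
          intro c hcl e he
          simp at he
          intro hce
          apply hrbl
          rw [← he, ← hce]
          exact hcl
        have hsub' : ∀ c ∈ l ++ [rb], c ∈ (d.insert ra rb).keys := by
          intro c hcm
          rw [hkeys']
          rcases List.mem_append.mp hcm with hcm | hcm
          · exact hsub c hcm
          · simp at hcm
            exact hcm ▸ hrb_k
        refine ⟨⟨l ++ [rb], rb, hc', hlnd', hsub'⟩, ?_⟩
        rw [ufFind_of_chain hnd' hc' hlnd' hsub', hfx, if_pos hr]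
      · have hral : ra ∉ l := by
          intro hmem
          obtain ⟨l', hc'⟩ := chain_suffix hc ra hmem
          exact hr (chain_from_root hra_root hc').1
        have hc' : ChainUF (d.insert ra rb) x l r :=
          chain_congr hc (fun c hcl => by
            have hcra : c ≠ ra := fun he => hral (he ▸ hcl)
            rw [hpr, if_neg hcra])
        have hsub' : ∀ c ∈ l, c ∈ (d.insert ra rb).keys := by
          intro c hcm
          rw [hkeys']
          exact hsub c hcm
        refine ⟨⟨l, r, hc', hlnd, hsub'⟩, ?_⟩
        rw [ufFind_of_chain hnd' hc' hlnd hsub', hfx, if_neg hr]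
    rw [hd]
    refine ⟨⟨hnd', ?_, ?_, ?_⟩, hkeys'⟩
    · rintro x y (hxy | ⟨rfl, rfl⟩)
      · obtain ⟨h1, h2⟩ := hR x y hxy
        rw [hkeys']
        exact ⟨h1, h2⟩
      · rw [hkeys']
        exact ⟨ha, hb⟩
    · intro x hx
      rw [hkeys'] at hx
      exact (H x hx).1
    · intro x hx y hy
      rw [hkeys'] at hx hy
      rw [(H x hx).2, (H y hy).2, eqv_add_pair]
      have hxa : Relation.EqvGen R x a ↔ ufFind d x = ra := by
        rw [← hfa]
        exact (hiff x hx a ha).symm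
      have hxb : Relation.EqvGen R x b ↔ ufFind d x = rb := by
        rw [← hfb]
        exact (hiff x hx b hb).symm
      have hay : Relation.EqvGen R a y ↔ ra = ufFind d y := by
        rw [← hfa]
        exact (hiff a ha y hy).symm
      have hby : Relation.EqvGen R b y ↔ rb = ufFind d y := by
        rw [← hfb]
        exact (hiff b hb y hy).symm
      have hxy : Relation.EqvGen R x y ↔ ufFind d x = ufFind d y :=
        (hiff x hx y hy).symm
      rw [hxy, hxa, hby, hxb, hay]
      by_cases h1 : ufFind d x = ra <;> by_cases h2 : ufFind d y = ra
      · rw [if_pos h1, if_pos h2, h1, h2]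
        simp
      · rw [if_pos h1, if_neg h2, h1]
        have h2' : ¬ ra = ufFind d y := fun he => h2 he.symm
        simp [h2', heq]
      · rw [if_neg h1, if_pos h2, h2]
        have hba : ¬ rb = ra := fun he => heq he.symm
        simp [h1, hba]
      · rw [if_neg h1, if_neg h2]
        have h2' : ¬ ra = ufFind d y := fun he => h2 he.symm
        simp [h1, h2']

-- right/down grid edges processed by Source B's build loop, from the already-scanned cells P
def EdgeR (g : List (List Int)) (bg : Int) (h w : Nat) (x y : Nat × Nat) : Prop :=
  okP g bg h w x ∧ okP g bg h w y ∧ (y = (x.1, x.2 + 1) ∨ y = (x.1 + 1, x.2))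

def EPrel (g : List (List Int)) (bg : Int) (h w : Nat) (P : List (Nat × Nat))
    (x y : Nat × Nat) : Prop :=
  x ∈ P ∧ EdgeR g bg h w x y

def BuildInv (g : List (List Int)) (bg : Int) (h w : Nat) (P : List (Nat × Nat))
    (d : PySem.Dict (Nat × Nat) (Nat × Nat)) : Prop :=
  UFInv d (EPrel g bg h w P) ∧
  (∀ x ∈ d.keys, okP g bg h w x) ∧
  (∀ t ∈ P, okP g bg h w t → t ∈ d.keys)

lemma edge_union_inv {g bg h w} {d0 : PySem.Dict (Nat × Nat) (Nat × Nat)}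
    {R0 : (Nat × Nat) → (Nat × Nat) → Prop} {p q : Nat × Nat}
    (hUF0 : UFInv d0 R0) (hok0 : ∀ x ∈ d0.keys, okP g bg h w x)
    (hpk : p ∈ d0.keys) (hokq : okP g bg h w q) :
    UFInv (unionUF (sdUF d0 q) p q) (fun x y => R0 x y ∨ (x = p ∧ y = q)) ∧
    (∀ x ∈ (unionUF (sdUF d0 q) p q).keys, okP g bg h w x) ∧
    (∀ x ∈ d0.keys, x ∈ (unionUF (sdUF d0 q) p q).keys) ∧
    p ∈ (unionUF (sdUF d0 q) p q).keys := by
  obtain ⟨hUF1, hk1, hq1, hmono1⟩ := sd_inv hUF0 q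
  obtain ⟨hUF2, hkeq⟩ := union_inv hUF1 (hmono1 p hpk) hq1
  refine ⟨hUF2, ?_, ?_, ?_⟩
  · intro x hx
    rw [hkeq] at hx
    rcases (hk1 x).mp hx with he | hx'
    · rw [he]
      exact hokq
    · exact hok0 x hx'
  · intro x hx
    rw [hkeq]
    exact hmono1 x hx
  · rw [hkeq]
    exact hmono1 p hpk

lemma buildStep_inv {g bg h w P d} {p : Nat × Nat} (hp : p.1 < h ∧ p.2 < w)
    (hI : BuildInv g bg h w P d) : BuildInv g bg h w (P ++ [p]) (buildStep g bg h w d p) := by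
  obtain ⟨hUF, hkok, hcov⟩ := hI
  by_cases hbg : cellv g p.1 p.2 = bg
  · unfold buildStep
    rw [if_pos hbg]
    refine ⟨UFInv_congr ?_ hUF, hkok, ?_⟩
    · intro x y
      unfold EPrel
      constructor
      · rintro ⟨hx, he⟩
        exact ⟨List.mem_append_left _ hx, he⟩
      · rintro ⟨hx, he⟩
        rcases List.mem_append.mp hx with hx | hx
        · exact ⟨hx, he⟩
        · simp at hx
          exact absurd (show cellv g x.1 x.2 = bg by rw [hx]; exact hbg) he.1.2.2
    · intro t ht hokt
      rcases List.mem_append.mp ht with ht | ht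
      · exact hcov t ht hokt
      · simp at ht
        exact absurd (show cellv g t.1 t.2 = bg by rw [ht]; exact hbg) hokt.2.2
  · have hokp : okP g bg h w p := ⟨hp.1, hp.2, hbg⟩
    obtain ⟨hUF1, hk1iff, hp1, hmono1⟩ := sd_inv hUF p
    have hk1ok : ∀ x ∈ (sdUF d p).keys, okP g bg h w x := by
      intro x hx
      rcases (hk1iff x).mp hx with he | hx'
      · rw [he]
        exact hokp
      · exact hkok x hx'
    have hokqr_iff : okP g bg h w (p.1, p.2 + 1) ↔
        (p.2 + 1 < w ∧ cellv g p.1 (p.2 + 1) ≠ bg) :=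
      ⟨fun hk => ⟨hk.2.1, hk.2.2⟩, fun hc => ⟨hp.1, hc.1, hc.2⟩⟩
    have hokqd_iff : okP g bg h w (p.1 + 1, p.2) ↔
        (p.1 + 1 < h ∧ cellv g (p.1 + 1) p.2 ≠ bg) :=
      ⟨fun hk => ⟨hk.1, hk.2.2⟩, fun hc => ⟨hc.1, hp.2, hc.2⟩⟩
    have hfin : ∀ (d3 : PySem.Dict (Nat × Nat) (Nat × Nat))
        (R3 : (Nat × Nat) → (Nat × Nat) → Prop),
        UFInv d3 R3 → (∀ x ∈ d3.keys, okP g bg h w x) →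
        (∀ x ∈ d.keys, x ∈ d3.keys) → p ∈ d3.keys →
        (∀ x y, R3 x y ↔ EPrel g bg h w (P ++ [p]) x y) →
        BuildInv g bg h w (P ++ [p]) d3 := by
      intro d3 R3 hUF3 hok3 hmono3 hp3 hiff3
      refine ⟨UFInv_congr hiff3 hUF3, hok3, ?_⟩
      intro t ht hokt
      rcases List.mem_append.mp ht with ht | ht
      · exact hmono3 t (hcov t ht hokt)
      · simp at ht
        rw [ht]
        exact hp3
    unfold buildStep
    rw [if_neg hbg]
    by_cases hcr : p.2 + 1 < w ∧ cellv g p.1 (p.2 + 1) ≠ bg <;>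
      by_cases hcd : p.1 + 1 < h ∧ cellv g (p.1 + 1) p.2 ≠ bg
    · obtain ⟨hUF2, hok2, hmono2, hp2⟩ :=
        edge_union_inv hUF1 hk1ok hp1 (hokqr_iff.mpr hcr)
      obtain ⟨hUF3, hok3, hmono3, hp3⟩ :=
        edge_union_inv hUF2 hok2 hp2 (hokqd_iff.mpr hcd)
      unfold buildStepR buildStepD
      rw [if_pos hcr, if_pos hcd]
      refine hfin _ _ hUF3 hok3
        (fun x hx => hmono3 x (hmono2 x (hmono1 x hx))) hp3 ?_
      intro x y
      unfold EPrel
      constructor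
      · rintro ((⟨hx, he⟩ | ⟨rfl, rfl⟩) | ⟨rfl, rfl⟩)
        · exact ⟨List.mem_append_left _ hx, he⟩
        · exact ⟨by simp, hokp, hokqr_iff.mpr hcr, Or.inl rfl⟩
        · exact ⟨by simp, hokp, hokqd_iff.mpr hcd, Or.inr rfl⟩
      · rintro ⟨hx, he⟩
        rcases List.mem_append.mp hx with hx | hx
        · exact Or.inl (Or.inl ⟨hx, he⟩)
        · simp at hx
          subst hx
          rcases he.2.2 with hy | hy
          · exact Or.inl (Or.inr ⟨rfl, hy⟩)
          · exact Or.inr ⟨rfl, hy⟩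
    · obtain ⟨hUF2, hok2, hmono2, hp2⟩ :=
        edge_union_inv hUF1 hk1ok hp1 (hokqr_iff.mpr hcr)
      unfold buildStepR buildStepD
      rw [if_pos hcr, if_neg hcd]
      refine hfin _ _ hUF2 hok2 (fun x hx => hmono2 x (hmono1 x hx)) hp2 ?_
      intro x y
      unfold EPrel
      constructor
      · rintro (⟨hx, he⟩ | ⟨rfl, rfl⟩)
        · exact ⟨List.mem_append_left _ hx, he⟩
        · exact ⟨by simp, hokp, hokqr_iff.mpr hcr, Or.inl rfl⟩
      · rintro ⟨hx, he⟩
        rcases List.mem_append.mp hx with hx | hx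
        · exact Or.inl ⟨hx, he⟩
        · simp at hx
          subst hx
          rcases he.2.2 with hy | hy
          · exact Or.inr ⟨rfl, hy⟩
          · exact absurd (hokqd_iff.mp (hy ▸ he.2.1)) hcd
    · unfold buildStepR buildStepD
      rw [if_neg hcr, if_pos hcd]
      obtain ⟨hUF2, hok2, hmono2, hp2⟩ :=
        edge_union_inv hUF1 hk1ok hp1 (hokqd_iff.mpr hcd)
      refine hfin _ _ hUF2 hok2 (fun x hx => hmono2 x (hmono1 x hx)) hp2 ?_
      intro x y
      unfold EPrel
      constructor
      · rintro (⟨hx, he⟩ | ⟨rfl, rfl⟩)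
        · exact ⟨List.mem_append_left _ hx, he⟩
        · exact ⟨by simp, hokp, hokqd_iff.mpr hcd, Or.inr rfl⟩
      · rintro ⟨hx, he⟩
        rcases List.mem_append.mp hx with hx | hx
        · exact Or.inl ⟨hx, he⟩
        · simp at hx
          subst hx
          rcases he.2.2 with hy | hy
          · exact absurd (hokqr_iff.mp (hy ▸ he.2.1)) hcr
          · exact Or.inr ⟨rfl, hy⟩
    · unfold buildStepR buildStepD
      rw [if_neg hcr, if_neg hcd]
      refine hfin _ _ hUF1 hk1ok hmono1 hp1 ?_
      intro x y
      unfold EPrel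
      constructor
      · rintro ⟨hx, he⟩
        exact ⟨List.mem_append_left _ hx, he⟩
      · rintro ⟨hx, he⟩
        rcases List.mem_append.mp hx with hx | hx
        · exact ⟨hx, he⟩
        · simp at hx
          subst hx
          rcases he.2.2 with hy | hy
          · exact absurd (hokqr_iff.mp (hy ▸ he.2.1)) hcr
          · exact absurd (hokqd_iff.mp (hy ▸ he.2.1)) hcd

lemma build_fold_inv {g bg h w} :
    ∀ (l P : List (Nat × Nat)) (d), (∀ q ∈ l, q.1 < h ∧ q.2 < w) →
    BuildInv g bg h w P d → BuildInv g bg h w (P ++ l) (l.foldl (buildStep g bg h w) d) := by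
  intro l
  induction l with
  | nil => intro P d _ hI; simpa using hI
  | cons p t ih =>
    intro P d hb hI
    have h1 := buildStep_inv (hb p (by simp)) hI
    have := ih (P ++ [p]) _ (fun q hq => hb q (by simp [hq])) h1
    simpa using this

-- the dict built by Source B's first loop, and the root function it induces
def DF (g : List (List Int)) (bg : Int) (h w : Nat) : PySem.Dict (Nat × Nat) (Nat × Nat) :=
  (cellsOf h w).foldl (buildStep g bg h w) PySem.Dict.empty

lemma DF_inv (g : List (List Int)) (bg : Int) (h w : Nat) :
    BuildInv g bg h w (cellsOf h w) (DF g bg h w) := by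
  have h0 : BuildInv g bg h w [] PySem.Dict.empty := by
    refine ⟨⟨by simp [PySem.Dict.keys_empty], ?_, ?_, ?_⟩, ?_, ?_⟩
    · intro x y hxy; exact absurd hxy.1 (by simp)
    · intro x hx; simp [PySem.Dict.keys_empty] at hx
    · intro x hx; simp [PySem.Dict.keys_empty] at hx
    · intro x hx; simp [PySem.Dict.keys_empty] at hx
    · intro t ht; simp at ht
  have := build_fold_inv (cellsOf h w) [] PySem.Dict.empty
    (fun q hq => mem_cellsOf.mp hq) h0
  simpa using this

lemma edgeR_adj {g bg h w} {x y : Nat × Nat} (he : EdgeR g bg h w x y) : adjP x y := by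
  obtain ⟨-, -, hdir⟩ := he
  unfold adjP
  rcases hdir with rfl | rfl
  · exact Or.inl ⟨rfl, Or.inl rfl⟩
  · exact Or.inr ⟨rfl, Or.inl rfl⟩

lemma adj_dir {q r : Nat × Nat} (ha : adjP q r) :
    (r = (q.1, q.2 + 1) ∨ r = (q.1 + 1, q.2)) ∨ (q = (r.1, r.2 + 1) ∨ q = (r.1 + 1, r.2)) := by
  obtain ⟨q1, q2⟩ := q
  obtain ⟨r1, r2⟩ := r
  rcases ha with ⟨h1, h2 | h2⟩ | ⟨h1, h2 | h2⟩
  · exact Or.inl (Or.inl (by simp at h1 h2 ⊢; omega))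
  · exact Or.inr (Or.inl (by simp at h1 h2 ⊢; omega))
  · exact Or.inl (Or.inr (by simp at h1 h2 ⊢; omega))
  · exact Or.inr (Or.inr (by simp at h1 h2 ⊢; omega))

lemma eqv_cells_to_conn {g bg h w} {x y : Nat × Nat}
    (h1 : Relation.EqvGen (EPrel g bg h w (cellsOf h w)) x y) :
    x = y ∨ Conn g bg h w x y := by
  induction h1 with
  | rel a b hab =>
    obtain ⟨-, he⟩ := hab
    exact Or.inr (Conn.tail (Conn.refl _ he.1) (edgeR_adj he) he.2.1)
  | refl a => exact Or.inl rfl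
  | symm a b _ ih =>
    rcases ih with rfl | hc
    · exact Or.inl rfl
    · exact Or.inr (Conn_symm hc)
  | trans a b c _ _ ih1 ih2 =>
    rcases ih1 with rfl | hc1
    · exact ih2
    · rcases ih2 with rfl | hc2
      · exact Or.inr hc1
      · exact Or.inr (Conn_trans hc1 hc2)

lemma conn_to_eqv_cells {g bg h w} {x y : Nat × Nat} (hc : Conn g bg h w x y) :
    Relation.EqvGen (EPrel g bg h w (cellsOf h w)) x y := by
  induction hc with
  | refl _ => exact Relation.EqvGen.refl _
  | tail hpq hadj hokr ih =>
    rename_i q' r'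
    have hokq : okP g bg h w q' := Conn_ok_right hpq
    have hstep : Relation.EqvGen (EPrel g bg h w (cellsOf h w)) q' r' := by
      rcases adj_dir hadj with hd | hd
      · exact Relation.EqvGen.rel _ _
          ⟨mem_cellsOf.mpr ⟨hokq.1, hokq.2.1⟩, hokq, hokr, hd⟩
      · refine Relation.EqvGen.symm _ _ (Relation.EqvGen.rel _ _
          ⟨mem_cellsOf.mpr ⟨hokr.1, hokr.2.1⟩, hokr, hokq, hd⟩)
    exact Relation.EqvGen.trans _ _ _ ih hstep

lemma keys_DF {g bg h w} {x : Nat × Nat} : x ∈ (DF g bg h w).keys ↔ okP g bg h w x := by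
  obtain ⟨hUF, hok, hcov⟩ := DF_inv g bg h w
  constructor
  · exact hok x
  · intro hx
    exact hcov x (mem_cellsOf.mpr ⟨hx.1, hx.2.1⟩) hx

lemma phi_spec {g bg h w} {x y : Nat × Nat} (hx : okP g bg h w x) (hy : okP g bg h w y) :
    ufFind (DF g bg h w) x = ufFind (DF g bg h w) y ↔ Conn g bg h w x y := by
  obtain ⟨⟨hnd, hR, hch, hiff⟩, hok, hcov⟩ := DF_inv g bg h w
  rw [hiff x (keys_DF.mpr hx) y (keys_DF.mpr hy)]
  constructor
  · intro h1
    rcases eqv_cells_to_conn h1 with rfl | h2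
    · exact Conn.refl _ hx
    · exact h2
  · exact conn_to_eqv_cells

-- ---------- seeds, buckets and the two scan invariants ----------

def okB (g : List (List Int)) (bg : Int) (h w : Nat) (p : Nat × Nat) : Bool :=
  decide (p.1 < h) && decide (p.2 < w) && !(decide (cellv g p.1 p.2 = bg))

lemma okB_iff {g bg h w p} : okB g bg h w p = true ↔ okP g bg h w p := by
  simp [okB, okP, and_assoc]

def seedStep (g : List (List Int)) (bg : Int) (h w : Nat) (φ : Nat × Nat → Nat × Nat)
    (acc : List (Nat × Nat)) (p : Nat × Nat) : List (Nat × Nat) :=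
  if okB g bg h w p && acc.all (fun s => !(φ s == φ p)) then acc ++ [p] else acc

def seedAcc (g : List (List Int)) (bg : Int) (h w : Nat) (φ : Nat × Nat → Nat × Nat)
    (P : List (Nat × Nat)) : List (Nat × Nat) :=
  P.foldl (seedStep g bg h w φ) []

def bucketF (g : List (List Int)) (bg : Int) (h w : Nat) (φ : Nat × Nat → Nat × Nat)
    (P : List (Nat × Nat)) (s : Nat × Nat) : List ((Nat × Nat) × Int) :=
  (P.filter (fun q => okB g bg h w q && (φ q == φ s))).map (fun q => (q, cellv g q.1 q.2))

lemma seedAcc_append {g bg h w φ P p} :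
    seedAcc g bg h w φ (P ++ [p]) = seedStep g bg h w φ (seedAcc g bg h w φ P) p := by
  simp [seedAcc]

lemma seedFold_ok {g bg h w φ} : ∀ (P acc : List (Nat × Nat)),
    (∀ s ∈ acc, okP g bg h w s) →
    ∀ s ∈ P.foldl (seedStep g bg h w φ) acc, okP g bg h w s ∧ (s ∈ acc ∨ s ∈ P) := by
  intro P
  induction P with
  | nil => intro acc hacc s hs; exact ⟨hacc s hs, Or.inl hs⟩
  | cons p t ih =>
    intro acc hacc s hs
    simp only [List.foldl_cons] at hs
    have hacc' : ∀ s ∈ seedStep g bg h w φ acc p, okP g bg h w s ∧ (s ∈ acc ∨ s = p) := by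
      intro s hs
      unfold seedStep at hs
      split at hs
      · rename_i hcond
        rcases List.mem_append.mp hs with hs | hs
        · exact ⟨hacc s hs, Or.inl hs⟩
        · simp at hs; subst hs
          exact ⟨okB_iff.mp (by exact (Bool.and_eq_true ..).mp hcond |>.1), Or.inr rfl⟩
      · exact ⟨hacc s hs, Or.inl hs⟩
    obtain ⟨hok, hmem⟩ := ih (seedStep g bg h w φ acc p) (fun s hs => (hacc' s hs).1) s hs
    refine ⟨hok, ?_⟩
    rcases hmem with hs' | hs'
    · rcases (hacc' s hs').2 with h1 | h1
      · exact Or.inl h1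
      · exact Or.inr (by simp [h1])
    · exact Or.inr (by simp [hs'])

lemma seedAcc_ok {g bg h w φ} {P : List (Nat × Nat)} {s} (hs : s ∈ seedAcc g bg h w φ P) :
    okP g bg h w s ∧ s ∈ P := by
  obtain ⟨h1, h2⟩ := seedFold_ok P [] (by simp) s hs
  rcases h2 with h2 | h2
  · simp at h2
  · exact ⟨h1, h2⟩

lemma seedFold_pairwise {g bg h w φ} : ∀ (P acc : List (Nat × Nat)),
    acc.Pairwise (fun s t => φ s ≠ φ t) →
    (P.foldl (seedStep g bg h w φ) acc).Pairwise (fun s t => φ s ≠ φ t) := by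
  intro P
  induction P with
  | nil => intro acc h; exact h
  | cons p t ih =>
    intro acc hacc
    simp only [List.foldl_cons]
    refine ih _ ?_
    unfold seedStep
    split
    · rename_i hcond
      have hall := (Bool.and_eq_true ..).mp hcond |>.2
      rw [List.all_eq_true] at hall
      refine List.pairwise_append.mpr ⟨hacc, by simp, ?_⟩
      intro a ha b hb
      simp at hb; subst hb
      have := hall a ha
      simpa using this
    · exact hacc

lemma seedAcc_pairwise {g bg h w φ} (P : List (Nat × Nat)) :
    (seedAcc g bg h w φ P).Pairwise (fun s t => φ s ≠ φ t) :=
  seedFold_pairwise P [] (by simp)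

lemma seedFold_mono {g bg h w φ} : ∀ (P acc : List (Nat × Nat)) {s}, s ∈ acc →
    s ∈ P.foldl (seedStep g bg h w φ) acc := by
  intro P
  induction P with
  | nil => intro acc s hs; exact hs
  | cons p t ih =>
    intro acc s hs
    simp only [List.foldl_cons]
    refine ih _ ?_
    unfold seedStep
    split
    · exact List.mem_append_left _ hs
    · exact hs

lemma seed_cover {g bg h w φ} : ∀ (P acc : List (Nat × Nat)) {t},
    t ∈ P → okP g bg h w t →
    ∃ s ∈ P.foldl (seedStep g bg h w φ) acc, φ s = φ t := by
  intro P
  induction P with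
  | nil => intro acc t ht; simp at ht
  | cons p q ih =>
    intro acc t ht hok
    rcases List.mem_cons.mp ht with rfl | ht
    · simp only [List.foldl_cons]
      by_cases hall : (acc.all (fun s => !(φ s == φ t))) = true
      · have hstep : seedStep g bg h w φ acc t = acc ++ [t] := by
          unfold seedStep
          rw [if_pos (by rw [okB_iff.mpr hok, hall]; rfl)]
        refine ⟨t, ?_, rfl⟩
        rw [hstep]
        exact seedFold_mono q _ (by simp)
      · simp only [List.all_eq_true, Bool.not_eq_true'] at hall
        push_neg at hall
        obtain ⟨s, hs, hφ⟩ := hall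
        refine ⟨s, seedFold_mono q _ ?_, by simpa using hφ⟩
        unfold seedStep
        split
        · exact List.mem_append_left _ hs
        · exact hs
    · simp only [List.foldl_cons]
      exact ih _ ht hok

-- relation between a seed and the object A's flood fill emits for it
def RelAB (g : List (List Int)) (bg : Int) (h w : Nat) (s : Nat × Nat)
    (obj : List ((Nat × Nat) × Int)) : Prop :=
  (∀ e ∈ obj, e.2 = cellv g e.1.1 e.1.2) ∧ (obj.map Prod.fst).Nodup ∧
  (∀ q, q ∈ obj.map Prod.fst ↔ Conn g bg h w s q)

def AInv (g : List (List Int)) (bg : Int) (h w : Nat) (φ : Nat × Nat → Nat × Nat)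
    (P : List (Nat × Nat)) (st : List (Nat × Nat) × List (List ((Nat × Nat) × Int))) : Prop :=
  (∀ q, q ∈ st.1 ↔ okP g bg h w q ∧ ∃ t ∈ P, Conn g bg h w t q) ∧
  List.Forall₂ (RelAB g bg h w) (seedAcc g bg h w φ P) st.2

lemma seedAcc_append_skip {g bg h w φ P} {p : Nat × Nat}
    (hall : ¬ (okB g bg h w p
      && (seedAcc g bg h w φ P).all fun s => !(φ s == φ p)) = true) :
    seedAcc g bg h w φ (P ++ [p]) = seedAcc g bg h w φ P := by
  rw [seedAcc_append]
  unfold seedStep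
  rw [if_neg hall]

lemma stepA_inv {g bg h w φ P st} {p : Nat × Nat} (hp : p.1 < h ∧ p.2 < w)
    (hφ : ∀ x y, okP g bg h w x → okP g bg h w y → (φ x = φ y ↔ Conn g bg h w x y))
    (hI : AInv g bg h w φ P st) : AInv g bg h w φ (P ++ [p]) (stepA g bg h w st p) := by
  obtain ⟨hvis, hF⟩ := hI
  by_cases hbg : cellv g p.1 p.2 = bg
  · have hstep : stepA g bg h w st p = st := by
      unfold stepA
      rw [if_pos (Or.inr hbg)]
    rw [hstep]
    refine ⟨?_, ?_⟩
    · intro q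
      rw [hvis q]
      constructor
      · rintro ⟨hq, t, ht, hc⟩
        exact ⟨hq, t, by simp [ht], hc⟩
      · rintro ⟨hq, t, ht, hc⟩
        rcases List.mem_append.mp ht with ht | ht
        · exact ⟨hq, t, ht, hc⟩
        · simp at ht; subst ht
          exact absurd (Conn_ok_left hc).2.2 (by simp [hbg])
    · rw [seedAcc_append_skip (by simp [okB, hbg])]
      exact hF
  · have hok : okP g bg h w p := ⟨hp.1, hp.2, hbg⟩
    by_cases hpv : p ∈ st.1
    · have hstep : stepA g bg h w st p = st := by
        unfold stepA
        rw [if_pos (Or.inl hpv)]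
      rw [hstep]
      obtain ⟨-, t, ht, hctp⟩ := (hvis p).mp hpv
      have hokt : okP g bg h w t := Conn_ok_left hctp
      obtain ⟨s, hs, hφst⟩ := seed_cover (φ := φ) P [] ht hokt
      have hφsp : φ s = φ p := by
        rw [hφst]
        exact (hφ t p hokt hok).mpr hctp
      refine ⟨?_, ?_⟩
      · intro q
        rw [hvis q]
        constructor
        · rintro ⟨hq, t', ht', hc⟩
          exact ⟨hq, t', by simp [ht'], hc⟩
        · rintro ⟨hq, t', ht', hc⟩
          rcases List.mem_append.mp ht' with ht' | ht'
          · exact ⟨hq, t', ht', hc⟩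
          · simp at ht'; subst ht'
            exact ⟨hq, t, ht, Conn_trans hctp hc⟩
      · rw [seedAcc_append_skip ?_]
        · exact hF
        · simp only [Bool.and_eq_true, List.all_eq_true]
          rintro ⟨-, hall⟩
          have := hall s hs
          simp [hφsp] at this
    · have hseed : ∀ s ∈ seedAcc g bg h w φ P, φ s ≠ φ p := by
        intro s hs hcon
        obtain ⟨hoks, hsP⟩ := seedAcc_ok hs
        have hcsp : Conn g bg h w s p := (hφ s p hoks hok).mp hcon
        exact hpv ((hvis p).mpr ⟨hok, s, hsP, hcsp⟩)
      have hnew : seedAcc g bg h w φ (P ++ [p]) = seedAcc g bg h w φ P ++ [p] := by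
        rw [seedAcc_append]
        unfold seedStep
        rw [if_pos ?_]
        simp only [Bool.and_eq_true, List.all_eq_true]
        refine ⟨okB_iff.mpr hok, ?_⟩
        intro s hs
        simp [hseed s hs]
      have hCC : ∀ x y, x ∈ st.1 → Conn g bg h w x y → y ∈ st.1 := by
        intro x y hx hc
        obtain ⟨-, t, ht, hctx⟩ := (hvis x).mp hx
        exact (hvis y).mpr ⟨Conn_ok_right hc, t, ht, Conn_trans hctx hc⟩
      have hInit : LoopInv g bg h w st.1 p (p :: st.1) [p] ([] : List (Nat × Nat)) := by
        refine ⟨by simp, ?_, by simp, ?_, by simp, by simp⟩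
        · intro q hq; simp at hq; subst hq; exact Reach.base
        · intro q; simp; tauto
      obtain ⟨hA1, hA2, hA3, hA4⟩ :=
        dfsA_spec g bg h w st.1 p hpv hok (p :: st.1) [p] [] (by simpa using hInit) (by simp)
      have hRC : ∀ q, Reach g bg h w st.1 p q ↔ Conn g bg h w p q :=
        fun q => ⟨reach_to_conn hok, conn_to_reach hCC hpv⟩
      have hstep : stepA g bg h w st p =
          ((dfsA g bg h w (p :: st.1) [p] []).1, st.2 ++ [(dfsA g bg h w (p :: st.1) [p] []).2]) := by
        unfold stepA
        rw [if_neg (by push_neg; exact ⟨hpv, hbg⟩)]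
      rw [hstep]
      refine ⟨?_, ?_⟩
      · intro q
        simp only
        rw [hA1 q]
        constructor
        · rintro (hq | hq)
          · obtain ⟨hq', t, ht, hc⟩ := (hvis q).mp hq
            exact ⟨hq', t, by simp [ht], hc⟩
          · have hc := (hRC q).mp hq
            exact ⟨Conn_ok_right hc, p, by simp, hc⟩
        · rintro ⟨hq, t, ht, hc⟩
          rcases List.mem_append.mp ht with ht | ht
          · exact Or.inl ((hvis q).mpr ⟨hq, t, ht, hc⟩)
          · simp at ht; subst ht
            exact Or.inr ((hRC q).mpr hc)
      · simp only
        rw [hnew]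
        refine List.rel_append hF ?_
        refine List.forall₂_cons.mpr ⟨⟨hA4, hA3, ?_⟩, List.Forall₂.nil⟩
        intro q
        rw [hA2 q, hRC q]

lemma afold_inv {g bg h w φ}
    (hφ : ∀ x y, okP g bg h w x → okP g bg h w y → (φ x = φ y ↔ Conn g bg h w x y)) :
    ∀ (l P : List (Nat × Nat)) st, (∀ q ∈ l, q.1 < h ∧ q.2 < w) →
    AInv g bg h w φ P st → AInv g bg h w φ (P ++ l) (l.foldl (stepA g bg h w) st) := by
  intro l
  induction l with
  | nil => intro P st _ hI; simpa using hI
  | cons p t ih =>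
    intro P st hb hI
    have h1 := stepA_inv (hb p (by simp)) hφ hI
    have := ih (P ++ [p]) _ (fun q hq => hb q (by simp [hq])) h1
    simpa using this

-- B's bucketing loop invariant
def CInv (g : List (List Int)) (bg : Int) (h w : Nat) (φ : Nat × Nat → Nat × Nat)
    (P : List (Nat × Nat)) (cm : PySem.Dict (Nat × Nat) (List ((Nat × Nat) × Int))) : Prop :=
  cm.items = (seedAcc g bg h w φ P).map (fun s => (φ s, bucketF g bg h w φ P s))

lemma bucketF_append_other {g bg h w φ P s} {p : Nat × Nat}
    (hne : ¬ (okB g bg h w p && (φ p == φ s)) = true) :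
    bucketF g bg h w φ (P ++ [p]) s = bucketF g bg h w φ P s := by
  unfold bucketF
  rw [List.filter_append]
  simp [List.filter, hne]

lemma bucketF_append_self {g bg h w φ P s} {p : Nat × Nat}
    (hok : okB g bg h w p = true) (hφ : φ p = φ s) :
    bucketF g bg h w φ (P ++ [p]) s
      = bucketF g bg h w φ P s ++ [(p, cellv g p.1 p.2)] := by
  unfold bucketF
  rw [List.filter_append]
  simp [List.filter, hok, hφ]

lemma compStep_inv {g bg h w P cm} {p : Nat × Nat} (hp : p.1 < h ∧ p.2 < w)
    (hI : CInv g bg h w (ufFind (DF g bg h w)) P cm) :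
    CInv g bg h w (ufFind (DF g bg h w)) (P ++ [p]) (compStep g bg (DF g bg h w) cm p) := by
  set φ := ufFind (DF g bg h w) with hphi
  set seeds := seedAcc g bg h w φ P with hseeds
  unfold CInv at hI
  by_cases hbg : cellv g p.1 p.2 = bg
  · have hokB : okB g bg h w p = false := by
      simp [okB, hbg]
    unfold compStep CInv
    rw [if_neg (by simpa using hbg), hI, seedAcc_append]
    unfold seedStep
    rw [hokB]
    simp only [Bool.false_and, Bool.false_eq_true, if_false]
    refine List.map_congr_left ?_
    intro s hs
    rw [bucketF_append_other (by simp [hokB])]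
  · have hok : okP g bg h w p := ⟨hp.1, hp.2, hbg⟩
    have hokB : okB g bg h w p = true := okB_iff.mpr hok
    have hkeys : cm.keys = seeds.map φ := by
      have : cm.keys = cm.items.map Prod.fst := by simp [PySem.Dict.keys]
      rw [this, hI, List.map_map]
      rfl
    have hkeysnd : cm.keys.Nodup := by
      rw [hkeys]
      exact List.Pairwise.map φ (fun a b hab => hab) (seedAcc_pairwise P)
    have hmod : compStep g bg (DF g bg h w) cm p
        = cm.insert (φ p) (cm.getD (φ p) [] ++ [(p, cellv g p.1 p.2)]) := by
      unfold compStep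
      rw [if_pos (by simpa using hbg)]
      rfl
    by_cases hex : ∃ s ∈ seeds, φ s = φ p
    · obtain ⟨s0, hs0, hphs0⟩ := hex
      have hsame : seedAcc g bg h w φ (P ++ [p]) = seeds := by
        rw [seedAcc_append]
        unfold seedStep
        have hcond : ¬ (okB g bg h w p
            && (seedAcc g bg h w φ P).all fun s => !(φ s == φ p)) = true := by
          simp only [Bool.and_eq_true, List.all_eq_true]
          rintro ⟨-, hall⟩
          have := hall s0 hs0
          simp [hphs0] at this
        rw [if_neg hcond]
      have hcont : cm.contains (φ p) = true := by
        rw [PySem.Dict.contains_eq_decide_mem_keys, hkeys]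
        simp only [decide_eq_true_eq]
        exact hphs0 ▸ List.mem_map_of_mem hs0
      have hgetD : cm.getD (φ p) [] = bucketF g bg h w φ P s0 := by
        rw [← hphs0]
        refine PySem.Dict.getD_of_mem_items _ ?_ hkeysnd []
        rw [hI]
        exact List.mem_map_of_mem hs0
      unfold CInv
      rw [hmod, PySem.Dict.items_insert_of_contains _ _ hcont, hI, hsame, List.map_map]
      refine List.map_congr_left ?_
      intro s hs
      simp only [Function.comp]
      by_cases hss : φ s = φ p
      · have hseq : s = s0 := by
          by_contra hne
          exact (List.Pairwise.forall (fun a b hab => fun he => hab he.symm)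
            (seedAcc_pairwise P) hs hs0 hne) (hss.trans hphs0.symm)
        subst hseq
        rw [if_pos (by simp [hss]), bucketF_append_self hokB hss.symm, hgetD, hss]
      · rw [if_neg (by simp [hss]), bucketF_append_other
          (by simp only [Bool.and_eq_true, beq_iff_eq]
              rintro ⟨-, he⟩
              exact hss he.symm)]
    · push_neg at hex
      have hnew : seedAcc g bg h w φ (P ++ [p]) = seeds ++ [p] := by
        rw [seedAcc_append]
        unfold seedStep
        rw [if_pos ?_]
        simp only [Bool.and_eq_true, List.all_eq_true]
        refine ⟨hokB, ?_⟩
        intro s hs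
        simp [hex s hs]
      have hcont : cm.contains (φ p) = false := by
        rw [PySem.Dict.contains_eq_decide_mem_keys, hkeys]
        simp only [decide_eq_false_iff_not]
        intro hmem
        obtain ⟨s, hs, hφs⟩ := List.mem_map.mp hmem
        exact hex s hs hφs
      have hgetD : cm.getD (φ p) [] = [] :=
        PySem.Dict.getD_of_not_contains _ _ hcont
      have hempty : bucketF g bg h w φ P p = [] := by
        unfold bucketF
        rw [List.filter_eq_nil_iff.mpr, List.map_nil]
        intro q hq
        simp only [Bool.and_eq_true, beq_iff_eq, not_and]
        intro hq1 hq2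
        obtain ⟨s, hs, hφs⟩ := seed_cover P [] hq (okB_iff.mp hq1)
        exact hex s hs (hφs.trans hq2)
      unfold CInv
      rw [hmod, PySem.Dict.items_insert_of_not_contains _ _ hcont, hI, hnew, hgetD,
        List.map_append]
      congr 1
      · refine List.map_congr_left ?_
        intro s hs
        rw [bucketF_append_other
          (by simp only [Bool.and_eq_true, beq_iff_eq]
              rintro ⟨-, he⟩
              exact hex s hs he.symm)]
      · simp only [List.map_cons, List.map_nil]
        rw [bucketF_append_self hokB rfl, hempty]

lemma cfold_inv {g bg h w} :
    ∀ (l P : List (Nat × Nat)) cm, (∀ q ∈ l, q.1 < h ∧ q.2 < w) →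
    CInv g bg h w (ufFind (DF g bg h w)) P cm →
    CInv g bg h w (ufFind (DF g bg h w)) (P ++ l)
      (l.foldl (compStep g bg (DF g bg h w)) cm) := by
  intro l
  induction l with
  | nil => intro P cm _ hI; simpa using hI
  | cons p t ih =>
    intro P cm hb hI
    have h1 := compStep_inv (hb p (by simp)) hI
    have := ih (P ++ [p]) _ (fun q hq => hb q (by simp [hq])) h1
    simpa using this

-- ---------- the write passes agree ----------

lemma upd2_comm (m : List (List Int)) {r c r' c' : Nat} (hne : r ≠ r' ∨ c ≠ c') (v v' : Int) :
    upd2 (upd2 m r c v) r' c' v' = upd2 (upd2 m r' c' v') r c v := by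
  by_cases hr : r = r'
  · subst hr
    rcases hne with hne | hne
    · exact absurd rfl hne
    · unfold upd2
      by_cases hlen : r < m.length
      · have hD : ∀ (X : List Int), (m.set r X).getD r [] = X := by
          intro X
          simp [List.getD, List.getElem?_set_self hlen]
        rw [hD, hD, List.set_set, List.set_set, List.set_comm _ _ hne]
      · have hno : ∀ (X : List Int), m.set r X = m :=
          fun X => List.set_eq_of_length_le (by omega)
        simp [hno]
  · unfold upd2
    have hD : ∀ (X : List Int) (i j : Nat), i ≠ j → (m.set i X).getD j [] = m.getD j [] := by
      intro X i j hij
      simp [List.getD, List.getElem?_set_ne hij]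
    rw [hD _ _ _ hr, hD _ _ _ (fun e => hr e.symm)]
    exact List.set_comm _ _ hr

lemma cellsOf_nodup {h w : Nat} : (cellsOf h w).Nodup :=
  List.Nodup.product List.nodup_range List.nodup_range

lemma maxColA_foldl (e : (Nat × Nat) × Int) (t : List ((Nat × Nat) × Int)) :
    maxColA (e :: t) = ((e :: t).map (fun e' => e'.1.2)).foldl max 0 := by
  simp only [maxColA, List.map_cons, List.foldl_cons, Nat.zero_max, List.foldl_map]

lemma maxColA_perm {l l' : List ((Nat × Nat) × Int)} (hp : l.Perm l') (hne : l ≠ []) :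
    maxColA l = maxColA l' := by
  obtain ⟨e, t, rfl⟩ := List.exists_cons_of_ne_nil hne
  have hne' : l' ≠ [] := by
    intro he
    subst he
    have := hp.length_eq
    simp at this
  obtain ⟨e', t', rfl⟩ := List.exists_cons_of_ne_nil hne'
  rw [maxColA_foldl, maxColA_foldl]
  refine List.Perm.foldl_eq' (f := max) (hp.map (fun e' => e'.1.2)) ?_ 0
  intro x _ y _ z
  rw [Nat.max_assoc, Nat.max_assoc, Nat.max_comm x y]

lemma maxColA_col_le {obj : List ((Nat × Nat) × Int)} {e : (Nat × Nat) × Int}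
    (he : e ∈ obj) : e.1.2 ≤ maxColA obj := by
  rcases obj with _ | ⟨e0, t⟩
  · simp at he
  · have h := PySem.List.le_foldl_max_nat t (fun e' : (Nat × Nat) × Int => e'.1.2) e0.1.2
    rcases List.mem_cons.mp he with rfl | he
    · simpa [maxColA] using h.1
    · simpa [maxColA] using h.2 e he

lemma maxColA_mem_col {obj : List ((Nat × Nat) × Int)} (hne : obj ≠ []) :
    ∃ e ∈ obj, maxColA obj = e.1.2 := by
  obtain ⟨e0, t, rfl⟩ := List.exists_cons_of_ne_nil hne
  have : maxColA (e0 :: t) = (t.map (fun e' => e'.1.2)).foldl max e0.1.2 := by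
    simp only [maxColA, List.foldl_map]
  rcases PySem.List.foldl_max_mem (t.map (fun e' => e'.1.2)) e0.1.2 with hm | hm
  · exact ⟨e0, by simp, by rw [this, hm]⟩
  · obtain ⟨e, he, he2⟩ := List.mem_map.mp hm
    exact ⟨e, by simp [he], by rw [this, ← he2]⟩

lemma write_eq {g bg h w φ} {s : Nat × Nat} {obj : List ((Nat × Nat) × Int)}
    (hφ : ∀ x y, okP g bg h w x → okP g bg h w y → (φ x = φ y ↔ Conn g bg h w x y))
    (hoks : okP g bg h w s) (hrel : RelAB g bg h w s obj) (X : List (List Int)) :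
    writeCompA w X obj = writeCompB w X (bucketF g bg h w φ (cellsOf h w) s) := by
  obtain ⟨hvals, hnd1, hiff1⟩ := hrel
  set B := bucketF g bg h w φ (cellsOf h w) s with hB
  set L2 := (cellsOf h w).filter (fun q => okB g bg h w q && (φ q == φ s)) with hL2
  have hok_of_conn : ∀ {q}, Conn g bg h w s q → okP g bg h w q := fun hc => Conn_ok_right hc
  have hmemL2 : ∀ q, q ∈ L2 ↔ Conn g bg h w s q := by
    intro q
    rw [hL2, List.mem_filter]
    constructor
    · rintro ⟨-, hcond⟩
      simp only [Bool.and_eq_true, beq_iff_eq] at hcond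
      have hokq := okB_iff.mp hcond.1
      exact Conn_symm ((hφ q s hokq hoks).mp hcond.2)
    · intro hc
      have hokq := hok_of_conn hc
      refine ⟨mem_cellsOf.mpr ⟨hokq.1, hokq.2.1⟩, ?_⟩
      simp only [Bool.and_eq_true, beq_iff_eq]
      exact ⟨okB_iff.mpr hokq, (hφ q s hokq hoks).mpr (Conn_symm hc)⟩
  have hnd2 : L2.Nodup := List.Nodup.filter _ cellsOf_nodup
  have hperm : (obj.map Prod.fst).Perm L2 :=
    (List.perm_ext_iff_of_nodup hnd1 hnd2).mpr (fun q => (hiff1 q).trans (hmemL2 q).symm)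
  have hObjRep : obj = (obj.map Prod.fst).map (fun q => (q, cellv g q.1 q.2)) := by
    clear hperm hnd1 hiff1
    induction obj with
    | nil => rfl
    | cons e t ih =>
      simp only [List.map_cons, List.map_map]
      have he : e = (e.1, cellv g e.1.1 e.1.2) := by
        obtain ⟨q, v⟩ := e
        have := hvals (q, v) (by simp)
        simp at this
        simp [this]
      rw [← he]
      have := ih (fun e' he' => hvals e' (by simp [he']))
      simp only [List.map_map] at this
      rw [← this]
  have hBRep : B = L2.map (fun q => (q, cellv g q.1 q.2)) := rfl
  have hpermObj : obj.Perm B := by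
    rw [hObjRep, hBRep]
    exact hperm.map _
  have hsObj : s ∈ obj.map Prod.fst := (hiff1 s).mpr (Conn.refl s hoks)
  have hne1 : obj ≠ [] := by
    intro he
    rw [he] at hsObj
    simp at hsObj
  have hmax : maxColA obj = maxColA B := maxColA_perm hpermObj hne1
  have hmlt : maxColA obj < w := by
    obtain ⟨e, he, hme⟩ := maxColA_mem_col hne1
    rw [hme]
    exact (hok_of_conn ((hiff1 e.1).mp (List.mem_map_of_mem he))).2.1
  -- drop A's guard: it always holds
  have hguard : writeCompA w X obj = writeCompB w X obj := by
    unfold writeCompA writeCompB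
    refine PySem.List.foldl_congr_mem obj _ _ X ?_
    intro acc e he
    have h1 : e.1.2 ≤ maxColA obj := maxColA_col_le he
    rw [if_pos (by constructor <;> [omega; omega])]
  rw [hguard]
  -- permute the unguarded write
  unfold writeCompB
  rw [← hmax]
  refine hpermObj.foldl_eq' ?_ X
  intro x hx y hy z
  by_cases hxy : x = y
  · rw [hxy]
  · have hxne : x.1 ≠ y.1 := by
      intro he
      exact hxy (List.inj_on_of_nodup_map hnd1 hx hy he)
    apply upd2_comm
    by_cases hr : x.1.1 = y.1.1
    · right
      have hc : x.1.2 ≠ y.1.2 := by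
        intro he
        exact hxne (Prod.ext hr he)
      have hx2 : x.1.2 ≤ maxColA obj := maxColA_col_le hx
      have hy2 : y.1.2 ≤ maxColA obj := maxColA_col_le hy
      intro he
      apply hc
      omega
    · exact Or.inl hr

lemma write_fold_eq {g bg h w φ}
    (hφ : ∀ x y, okP g bg h w x → okP g bg h w y → (φ x = φ y ↔ Conn g bg h w x y)) :
    ∀ {seeds : List (Nat × Nat)} {objs : List (List ((Nat × Nat) × Int))},
    List.Forall₂ (RelAB g bg h w) seeds objs → (∀ s ∈ seeds, okP g bg h w s) →
    ∀ X : List (List Int),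
    objs.foldl (writeCompA w) X =
      seeds.foldl (fun res t => writeCompB w res (bucketF g bg h w φ (cellsOf h w) t)) X := by
  intro seeds objs hF
  induction hF with
  | nil => intro _ X; rfl
  | cons hR hF ih =>
    intro hok X
    simp only [List.foldl_cons]
    rw [write_eq hφ (hok _ (by simp)) hR]
    exact ih (fun s hs => hok s (by simp [hs])) _

lemma foldl_flat {σ : Type} (F : σ → Nat × Nat → σ) (h w : Nat) (init : σ) :
    (List.range h).foldl (fun st r => (List.range w).foldl (fun st c => F st (r, c)) st) init
    = (cellsOf h w).foldl F init := by
  have H : ∀ (l : List Nat) (init : σ),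
      l.foldl (fun st r => (List.range w).foldl (fun st c => F st (r, c)) st) init
      = (l.flatMap (fun r => (List.range w).map (fun c => (r, c)))).foldl F init := by
    intro l
    induction l with
    | nil => intro init; simp
    | cons r t ih => intro init; simp [List.foldl_append, List.foldl_map, ih]
  simpa [cellsOf] using H (List.range h) init

-- ===== VERDICT (by name: the statement is the Claim_ definition above) =====
theorem move_all_to_right_spec : Claim_equal_move_all_to_right := by
  intro g _ _
  unfold Spec_move_all_to_right move_all_to_right move_all_to_right_alt
  simp only []
  set bg := bgOf g with hbg
  set h := g.length with hh
  set w := (g.headD []).length with hw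
  rw [foldl_flat, foldl_flat, foldl_flat]
  rw [show (cellsOf h w).foldl (buildStep g bg h w) PySem.Dict.empty = DF g bg h w from rfl]
  set φ := ufFind (DF g bg h w) with hphi
  have hφ : ∀ x y, okP g bg h w x → okP g bg h w y → (φ x = φ y ↔ Conn g bg h w x y) :=
    fun x y hx hy => phi_spec hx hy
  have hbounds : ∀ q ∈ cellsOf h w, q.1 < h ∧ q.2 < w := fun q hq => mem_cellsOf.mp hq
  have hA0 : AInv g bg h w φ [] (([], []) :
      List (Nat × Nat) × List (List ((Nat × Nat) × Int))) := by
    refine ⟨?_, ?_⟩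
    · intro q
      simp
    · exact List.Forall₂.nil
  have hA := afold_inv hφ (cellsOf h w) [] ([], []) hbounds hA0
  rw [List.nil_append] at hA
  obtain ⟨-, hF⟩ := hA
  have hC0 : CInv g bg h w φ [] PySem.Dict.empty := rfl
  have hC := cfold_inv (cellsOf h w) [] PySem.Dict.empty hbounds hC0
  rw [List.nil_append] at hC
  unfold CInv at hC
  set seeds := seedAcc g bg h w φ (cellsOf h w) with hseeds
  set objs := ((cellsOf h w).foldl (stepA g bg h w) ([], [])).2 with hobjs
  set cm := (cellsOf h w).foldl (compStep g bg (DF g bg h w)) PySem.Dict.empty with hcm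
  by_cases hnil : objs = []
  · have hsnil : seeds = [] := by
      rw [hnil] at hF
      exact List.forall₂_nil_right_iff.mp hF
    rw [if_pos hnil, if_pos (by rw [hC, hsnil]; rfl)]
  · have hsnil : seeds ≠ [] := by
      intro he
      rw [he] at hF
      exact hnil (List.forall₂_nil_left_iff.mp hF)
    rw [if_neg hnil, if_neg (by rw [hC]; simpa using hsnil)]
    rw [hC, List.foldl_map]
    exact write_fold_eq hφ hF (fun s hs => (seedAcc_ok hs).1) _
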